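-- pv_equiv track=rewrite | github.com/yannickloth/W33-Theory | tools/h12_triangle_label_functions.py | fit_polynomial
-- ===== SOURCE A (Python) =====
-- def row_reduce_mod3(mat, vec=None):
--     m = [list(row) for row in mat]
--     b = list(vec) if vec is not None else None
--     n_rows = len(m)
--     n_cols = len(m[0]) if n_rows else 0
--     rank = 0
--     col = 0
--     pivots = []
--     while rank < n_rows and col < n_cols:
--         pivot = None
--         for r in range(rank, n_rows):
--             if m[r][col] % 3 != 0:
--                 pivot = r
--                 break
--         if pivot is None:
--             col += 1
--             continue
--         m[rank], m[pivot] = m[pivot], m[rank]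
--         if b is not None:
--             b[rank], b[pivot] = b[pivot], b[rank]
--         inv = 1 if m[rank][col] == 1 else 2
--         m[rank] = [(inv * x) % 3 for x in m[rank]]
--         if b is not None:
--             b[rank] = (inv * b[rank]) % 3
--         for r in range(n_rows):
--             if r == rank:
--                 continue
--             factor = m[r][col] % 3
--             if factor != 0:
--                 m[r] = [(m[r][c] - factor * m[rank][c]) % 3 for c in range(n_cols)]
--                 if b is not None:
--                     b[r] = (b[r] - factor * b[rank]) % 3
--         pivots.append(col)
--         rank += 1
--         col += 1
--     return rank, m, b, pivots
--
-- def solve_linear_mod3(A, b):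
--     rank, rref, b2, pivots = row_reduce_mod3(A, b)
--     for i in range(rank, len(A)):
--         if b2[i] % 3 != 0:
--             return None
--     n_cols = len(A[0])
--     x = [0] * n_cols
--     for i, col in enumerate(pivots):
--         x[col] = b2[i]
--     return x
--
-- def generate_monomials(max_degree):
--     exps = []
--     for e0 in range(max_degree + 1):
--         for e1 in range(max_degree + 1):
--             for e2 in range(max_degree + 1):
--                 if e0 + e1 + e2 <= max_degree:
--                     exps.append((e0, e1, e2))
--     return exps
--
-- def eval_monomial(exp, vars3):
--     val = 1
--     for e, v in zip(exp, vars3):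
--         val = (val * pow(v, e, 3)) % 3
--     return val
--
-- def fit_polynomial(samples, degree):
--     exps = generate_monomials(degree)
--     A = []
--     b = []
--     for (u1, u2, z), label in samples:
--         A.append([eval_monomial(exp, (u1, u2, z)) for exp in exps])
--         b.append(label)
--     sol = solve_linear_mod3(A, b)
--     return sol, exps
-- ===== SOURCE B (Python) =====
-- # Forward-only Gaussian elimination to an echelon list of (pivot, row) pairs,
-- # followed by back substitution, instead of A's full Gauss-Jordan RREF read-off.
--
-- def _term(exp, vars3):
--     # value of the monomial over GF(3), using v^e mod 3 in closed form
--     val = 1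
--     for e, v in zip(exp, vars3):
--         if e:
--             r = v % 3
--             val = (val * (1 if (r == 2 and e % 2 == 0) else r)) % 3
--     return val
--
-- def _elim(row, norm, col):
--     f = row[col] % 3
--     if f == 0:
--         return row
--     return [(a - f * p) % 3 for a, p in zip(row, norm)]
--
-- def fit_polynomial(samples, degree):
--     exps = [(e0, e1, e2)
--             for e0 in range(degree + 1)
--             for e1 in range(degree + 1 - e0)
--             for e2 in range(degree + 1 - e0 - e1)]
--     n = len(exps)
--     # augmented rows: coefficients ++ [label]
--     rows = [[_term(e, v) for e in exps] + [label] for v, label in samples]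
--     # forward pass: triangularize, keeping (pivot column, normalized row) pairs
--     echelon = []
--     rest = rows
--     col = 0
--     while rest and col < n:
--         k = next((i for i, r in enumerate(rest) if r[col] % 3), None)
--         if k is None:
--             col += 1
--             continue
--         rest[0], rest[k] = rest[k], rest[0]
--         piv = rest.pop(0)
--         inv = 1 if piv[col] == 1 else 2
--         norm = [(inv * x) % 3 for x in piv]
--         echelon.append((col, norm))
--         rest = [_elim(r, norm, col) for r in rest]
--         col += 1
--     # rows whose coefficients vanished must carry a zero label
--     if any(r[-1] % 3 for r in rest):
--         return None, exps
--     # back substitution: free variables stay 0, so only pivot columns matter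
--     x = [0] * n
--     for i in range(len(echelon) - 1, -1, -1):
--         p, row = echelon[i]
--         s = row[-1]
--         for q, _ in echelon[i + 1:]:
--             s -= row[q] * x[q]
--         x[p] = s % 3
--     return x, exps
-- ===== Notes on version B (the rewrite author's own statement) =====
-- stated objective: alternative
-- what changed: Replaces A's full Gauss-Jordan reduction to RREF plus direct read-off of the reduced right-hand sides with a forward-only Gaussian elimination that builds an echelon list of (pivot column, normalized row) pairs, never touching rows above the pivot, and then recovers the pivot variables by back substitution over that list (free variables stay 0); the monomial list is built by dependent ranges instead of a filtered cube.
import Mathlib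
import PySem

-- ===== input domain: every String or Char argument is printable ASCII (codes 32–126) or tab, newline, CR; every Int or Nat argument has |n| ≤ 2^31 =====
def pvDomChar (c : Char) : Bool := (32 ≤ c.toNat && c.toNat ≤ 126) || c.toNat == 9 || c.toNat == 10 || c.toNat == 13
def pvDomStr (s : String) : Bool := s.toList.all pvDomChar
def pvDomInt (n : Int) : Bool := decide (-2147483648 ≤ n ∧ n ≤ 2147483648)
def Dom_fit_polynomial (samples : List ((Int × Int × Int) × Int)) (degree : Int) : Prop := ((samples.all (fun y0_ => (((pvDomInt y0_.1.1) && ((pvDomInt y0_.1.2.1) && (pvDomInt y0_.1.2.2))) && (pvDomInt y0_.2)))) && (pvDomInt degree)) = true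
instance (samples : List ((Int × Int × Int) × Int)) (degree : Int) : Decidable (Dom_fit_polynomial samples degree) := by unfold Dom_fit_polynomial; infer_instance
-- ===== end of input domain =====

-- B replaces A's full Gauss-Jordan reduction to RREF (with read-off of the reduced
-- right-hand sides) by a forward-only Gaussian elimination producing an echelon list
-- of (pivot column, normalized row) pairs followed by back substitution
-- (objective: alternative algorithmic decomposition, same asymptotic cost).

-- ===== PORT A =====
-- eval_monomial: val = 1; for e, v in zip(exp, vars3): val = (val * pow(v, e, 3)) % 3
def pvEvalMonomial (exp : Int × Int × Int) (vars3 : Int × Int × Int) : Int :=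
  [(exp.1, vars3.1), (exp.2.1, vars3.2.1), (exp.2.2, vars3.2.2)].foldl
    (fun val ev => PySem.Int.mod (val * PySem.Int.powMod ev.2 ev.1.toNat 3) 3) 1

-- generate_monomials: triple loop over range(max_degree+1) with a total-degree filter
def pvGenerateMonomials (maxDegree : Int) : List (Int × Int × Int) :=
  (PySem.List.pyRange 0 (maxDegree + 1) 1).flatMap fun e0 =>
    (PySem.List.pyRange 0 (maxDegree + 1) 1).flatMap fun e1 =>
      (PySem.List.pyRange 0 (maxDegree + 1) 1).filterMap fun e2 =>
        if e0 + e1 + e2 ≤ maxDegree then some (e0, e1, e2) else none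

-- for r in range(rank, n_rows): if m[r][col] % 3 != 0: pivot = r; break
def pvFindPivot (m : List (List Int)) (rank nRows col : Nat) : Option Nat :=
  (List.range' rank (nRows - rank)).find? fun r =>
    PySem.Int.mod ((m.getD r []).getD col 0) 3 != 0

-- m[i], m[j] = m[j], m[i]
def pvSwap {α : Type} (l : List α) (i j : Nat) (d : α) : List α :=
  (l.set i (l.getD j d)).set j (l.getD i d)

-- the elimination loop over all rows r != rank, acting on the matrix
def pvElimM (nCols col rank : Nat) (m : List (List Int)) : List (List Int) :=
  m.mapIdx fun r row =>
    if r = rank then row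
    else
      let factor := PySem.Int.mod (row.getD col 0) 3
      if factor ≠ 0 then
        (List.range nCols).map fun c =>
          PySem.Int.mod (row.getD c 0 - factor * ((m.getD rank []).getD c 0)) 3
      else row

-- the same loop acting on b (factor read from the matrix row, b[rank] fixed)
def pvElimV (col rank : Nat) (m : List (List Int)) (b : List Int) : List Int :=
  b.mapIdx fun r bi =>
    if r = rank then bi
    else
      let factor := PySem.Int.mod ((m.getD r []).getD col 0) 3
      if factor ≠ 0 then PySem.Int.mod (bi - factor * b.getD rank 0) 3 else bi

-- while rank < n_rows and col < n_cols: …   (col increases every iteration, fuel = n_cols)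
def pvRowReduceLoop (nRows nCols : Nat) :
    Nat → List (List Int) → List Int → Nat → Nat → List Nat →
    Nat × List (List Int) × List Int × List Nat
  | 0, m, b, rank, _col, pivots => (rank, m, b, pivots)
  | fuel + 1, m, b, rank, col, pivots =>
    if rank < nRows ∧ col < nCols then
      match pvFindPivot m rank nRows col with
      | none => pvRowReduceLoop nRows nCols fuel m b rank (col + 1) pivots
      | some p =>
        let m1 := pvSwap m rank p []
        let b1 := pvSwap b rank p 0
        let inv : Int := if (m1.getD rank []).getD col 0 = 1 then 1 else 2
        let prow := (m1.getD rank []).map fun x => PySem.Int.mod (inv * x) 3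
        let m2 := m1.set rank prow
        let b2 := b1.set rank (PySem.Int.mod (inv * b1.getD rank 0) 3)
        pvRowReduceLoop nRows nCols fuel (pvElimM nCols col rank m2) (pvElimV col rank m2 b2)
          (rank + 1) (col + 1) (pivots ++ [col])
    else (rank, m, b, pivots)

def pvRowReduceMod3 (mat : List (List Int)) (vec : List Int) :
    Nat × List (List Int) × List Int × List Nat :=
  let nRows := mat.length
  let nCols := (mat.getD 0 []).length    -- len(m[0]) if n_rows else 0
  pvRowReduceLoop nRows nCols nCols mat vec 0 0 []

-- for i, col in enumerate(pivots): x[col] = b2[i]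
def pvAssign (b2 : List Int) : Nat → List Nat → List Int → List Int
  | _i, [], x => x
  | i, p :: ps, x => pvAssign b2 (i + 1) ps (x.set p (b2.getD i 0))

def pvSolveLinearMod3 (A : List (List Int)) (b : List Int) : Option (List Int) :=
  match pvRowReduceMod3 A b with
  | (rank, _rref, b2, pivots) =>
    if (List.range' rank (A.length - rank)).any (fun i => PySem.Int.mod (b2.getD i 0) 3 != 0) then
      none
    else
      -- Python: n_cols = len(A[0]) raises IndexError on A = []; Pre_ excludes samples = []
      some (pvAssign b2 0 pivots (List.replicate (A.getD 0 []).length 0))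

def fit_polynomial (samples : List ((Int × Int × Int) × Int)) (degree : Int) :
    Option (List Int) × (List (Int × Int × Int)) :=
  let exps := pvGenerateMonomials degree
  let A := samples.map fun s => exps.map fun exp => pvEvalMonomial exp s.1
  let b := samples.map fun s => s.2
  (pvSolveLinearMod3 A b, exps)

-- ===== PORT B =====
-- _term: closed-form v^e mod 3 per factor, skipping e = 0
def pvAltTerm (exp : Int × Int × Int) (vars3 : Int × Int × Int) : Int :=
  [(exp.1, vars3.1), (exp.2.1, vars3.2.1), (exp.2.2, vars3.2.2)].foldl
    (fun val ev =>
      if ev.1 ≠ 0 then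
        let r := PySem.Int.mod ev.2 3
        PySem.Int.mod (val * (if r = 2 ∧ PySem.Int.mod ev.1 2 = 0 then 1 else r)) 3
      else val) 1

-- exps comprehension with nested dependent ranges (no filter)
def pvAltMonomials (degree : Int) : List (Int × Int × Int) :=
  (PySem.List.pyRange 0 (degree + 1) 1).flatMap fun e0 =>
    (PySem.List.pyRange 0 (degree + 1 - e0) 1).flatMap fun e1 =>
      (PySem.List.pyRange 0 (degree + 1 - e0 - e1) 1).map fun e2 => (e0, e1, e2)

-- _elim on one augmented row
def pvAltElim (col : Nat) (norm row : List Int) : List Int :=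
  let f := PySem.Int.mod (row.getD col 0) 3
  if f = 0 then row
  else List.zipWith (fun a p => PySem.Int.mod (a - f * p) 3) row norm

-- r[-1]
def pvAltLast (row : List Int) : Int := (PySem.List.pyGet? row (-1)).getD 0

-- while rest and col < n: find pivot, swap to front, pop, normalize, eliminate below
def pvFwdLoop : List Nat → List (Nat × List Int) → List (List Int) →
    List (Nat × List Int) × List (List Int)
  | [], ech, rest => (ech, rest)
  | col :: cols, ech, rest =>
    if rest.isEmpty then (ech, rest)
    else
      match rest.findIdx? (fun r => PySem.Int.mod (r.getD col 0) 3 != 0) with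
      | none => pvFwdLoop cols ech rest
      | some k =>
        let piv := rest.getD k []
        let pool := if k = 0 then rest.drop 1 else (rest.drop 1).set (k - 1) (rest.getD 0 [])
        let inv : Int := if piv.getD col 0 = 1 then 1 else 2
        let norm := piv.map fun x => PySem.Int.mod (inv * x) 3
        pvFwdLoop cols (ech ++ [(col, norm)]) (pool.map (pvAltElim col norm))

-- for i in reversed indices of echelon: x[p] = (row[-1] - Σ row[q]*x[q] over later pivots) % 3
def pvBackSub : List (Nat × List Int) → List Int → List Int
  | [], x => x
  | (p, row) :: es, x =>
    let x1 := pvBackSub es x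
    x1.set p (PySem.Int.mod
      (es.foldl (fun s qr => s - row.getD qr.1 0 * x1.getD qr.1 0) (pvAltLast row)) 3)

def fit_polynomial_alt (samples : List ((Int × Int × Int) × Int)) (degree : Int) :
    Option (List Int) × (List (Int × Int × Int)) :=
  let exps := pvAltMonomials degree
  let n := exps.length
  let rows := samples.map fun s => (exps.map fun e => pvAltTerm e s.1) ++ [s.2]
  match pvFwdLoop (List.range n) [] rows with
  | (ech, rest) =>
    if rest.any (fun r => PySem.Int.mod (pvAltLast r) 3 != 0) then (none, exps)
    else (some (pvBackSub ech (List.replicate n 0)), exps)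

-- ===== PRECONDITION & SPEC =====
-- Pre_ excludes only samples = [], on which Python A raises IndexError (len(A[0]) of an empty matrix).
def Pre_fit_polynomial (samples : List ((Int × Int × Int) × Int)) (degree : Int) : Prop :=
  samples ≠ []
instance (samples : List ((Int × Int × Int) × Int)) (degree : Int) : Decidable (Pre_fit_polynomial samples degree) := by unfold Pre_fit_polynomial; infer_instance

def pvWitness_fit_polynomial : (List ((Int × Int × Int) × Int)) × Int := ([((0, 0, 0), 1)], 1)

def Spec_fit_polynomial (samples : List ((Int × Int × Int) × Int)) (degree : Int) (out : Option (List Int) × (List (Int × Int × Int))) : Prop := out = fit_polynomial_alt samples degree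
instance (samples : List ((Int × Int × Int) × Int)) (degree : Int) (out : Option (List Int) × (List (Int × Int × Int))) : Decidable (Spec_fit_polynomial samples degree out) := by unfold Spec_fit_polynomial; infer_instance

-- ===== CLAIM (what is proved, stated in full; the proofs are below) =====
def Claim_equal_fit_polynomial : Prop := ∀ (samples : List ((Int × Int × Int) × Int)) (degree : Int), Dom_fit_polynomial samples degree → Pre_fit_polynomial samples degree → Spec_fit_polynomial samples degree (fit_polynomial samples degree)

-- ===== LEMMAS AND PROOFS =====

-- A's Gauss-Jordan loop rephrased on augmented rows split as (done, rest): a pure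
-- proof-side device, used as the bridge between the two ports.
def pvGJLoop : List Nat → List (List Int) → List Nat → List (List Int) →
    List (List Int) × List Nat × List (List Int)
  | [], done, pivots, rest => (done, pivots, rest)
  | col :: cols, done, pivots, rest =>
    if rest.isEmpty then (done, pivots, rest)
    else
      match rest.findIdx? (fun r => PySem.Int.mod (r.getD col 0) 3 != 0) with
      | none => pvGJLoop cols done pivots rest
      | some k =>
        let piv := rest.getD k []
        let pool := if k = 0 then rest.drop 1 else (rest.drop 1).set (k - 1) (rest.getD 0 [])
        let inv : Int := if piv.getD col 0 = 1 then 1 else 2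
        let norm := piv.map fun x => PySem.Int.mod (inv * x) 3
        pvGJLoop cols (done.map (pvAltElim col norm) ++ [norm]) (pivots ++ [col])
          (pool.map (pvAltElim col norm))

-- "finish the elimination": the Gauss-Jordan closure of an echelon list, from the back
def pvChain (prs : List (Nat × List Int)) (r : List Int) : List Int :=
  prs.foldl (fun r qr => pvAltElim qr.1 qr.2 r) r

def pvPhiP : List (Nat × List Int) → List (Nat × List Int)
  | [] => []
  | (p, row) :: es => (p, pvChain (pvPhiP es) row) :: pvPhiP es

-- entrywise congruence mod 3 (with equal length)
def pvMEq (u v : List Int) : Prop :=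
  u.length = v.length ∧ ∀ i : Nat, u.getD i 0 % 3 = v.getD i 0 % 3

-- entrywise bounds 0 ≤ · < 3
def pvBnd (u : List Int) : Prop := ∀ i : Nat, 0 ≤ u.getD i 0 ∧ u.getD i 0 < 3

-- v ≡ u + c · norm, entrywise mod 3
def pvSh (norm u v : List Int) (c : Int) : Prop :=
  u.length = v.length ∧ ∀ i : Nat, v.getD i 0 % 3 = (u.getD i 0 + c * norm.getD i 0) % 3

-- invariants of the forward loop's echelon list
def pvEchOK (N c : Nat) (ech : List (Nat × List Int)) : Prop :=
  (∀ pr ∈ ech, pr.1 < c ∧ pr.2.length = N + 1 ∧ pvBnd pr.2 ∧ pr.2.getD pr.1 0 % 3 = 1) ∧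
  List.Pairwise (fun a b : Nat × List Int => a.1 < b.1 ∧ b.2.getD a.1 0 % 3 = 0) ech

def pvRestOK (N : Nat) (pivs : List Nat) (r : List Int) : Prop :=
  r.length = N + 1 ∧ (∀ q ∈ pivs, r.getD q 0 % 3 = 0) ∧
  (∀ i : Nat, i < N → 0 ≤ r.getD i 0 ∧ r.getD i 0 < 3)

def pvDoneOK (N : Nat) (d : List Int) : Prop := d.length = N + 1 ∧ pvBnd d

-- r[-1] of a nonempty list is its last element
theorem pv_pyLast (l : List Int) (h : l ≠ []) : pvAltLast l = l.getLastD 0 := by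
  unfold pvAltLast
  simp only [PySem.List.pyGet?, PySem.List.pyIdx?]
  have hl : 0 < l.length := List.length_pos_iff.mpr h
  have h1 : ¬ (0:Int) ≤ -1 := by norm_num
  have h2 : -(l.length:Int) ≤ -1 := by omega
  simp only [if_neg h1, if_pos h2]
  simp only [Option.bind_some]
  have h3 : l.length - (-(-1:Int)).toNat = l.length - 1 := by norm_num
  rw [h3, List.getElem?_eq_getElem (by omega), List.getLastD_eq_getLast?,
    List.getLast?_eq_getElem?, List.getElem?_eq_getElem (by omega)]

-- mod-3 congruence converters (Int.ModEq 3 is definitionally an emod equation)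
theorem pv_meq {a b : Int} (h : a % 3 = b % 3) : Int.ModEq 3 a b := h
theorem pv_meq' {a b : Int} (h : Int.ModEq 3 a b) : a % 3 = b % 3 := h

-- PySem mod by 3 is emod
theorem pv_mod3 (x : Int) : PySem.Int.mod x 3 = x % 3 :=
  PySem.Int.mod_eq_emod_of_pos (by norm_num)

-- getD at the last position
theorem pv_getD_last (w : List Int) (n : Nat) (hw : w.length = n + 1) :
    w.getD n 0 = w.getLastD 0 := by
  rw [List.getD_eq_getElem _ _ (by omega), List.getLastD_eq_getLast?,
    List.getLast?_eq_getElem?, List.getElem?_eq_getElem (by omega)]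
  simp [hw]

-- entrywise congruence of an elimination step
theorem pv_elim_mod (col : Nat) (norm r : List Int) (h : norm.length = r.length) (i : Nat) :
    (pvAltElim col norm r).getD i 0 % 3 = (r.getD i 0 - r.getD col 0 * norm.getD i 0) % 3 := by
  have hmc : Int.ModEq 3 (r.getD col 0) (r.getD col 0 % 3) :=
    (Int.emod_emod_of_dvd _ dvd_rfl).symm
  unfold pvAltElim
  rw [pv_mod3]
  by_cases hf : r.getD col 0 % 3 = 0
  · rw [if_pos hf]
    have : Int.ModEq 3 (r.getD i 0 - r.getD col 0 * norm.getD i 0) (r.getD i 0) := by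
      have h0 : Int.ModEq 3 (r.getD col 0) 0 := by rw [hf] at hmc; simpa using hmc
      simpa using (Int.ModEq.refl (r.getD i 0)).sub (h0.mul_right (norm.getD i 0))
    exact this.symm
  · rw [if_neg hf]
    by_cases hi : i < r.length
    · rw [List.getD_eq_getElem _ _ (by rw [List.length_zipWith]; omega),
        List.getElem_zipWith]
      rw [pv_mod3, Int.emod_emod_of_dvd _ dvd_rfl]
      have hre : r[i] = r.getD i 0 := (List.getD_eq_getElem _ _ hi).symm
      have hne : norm[i]'(by omega) = norm.getD i 0 := (List.getD_eq_getElem _ _ (by omega)).symm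
      rw [hre, hne]
      exact ((Int.ModEq.refl (r.getD i 0)).sub (hmc.symm.mul_right (norm.getD i 0)))
    · have hr0 : r.getD i 0 = 0 := List.getD_eq_default _ _ (by omega)
      have hn0 : norm.getD i 0 = 0 := List.getD_eq_default _ _ (by omega)
      rw [List.getD_eq_default _ _ (by rw [List.length_zipWith]; omega), hr0, hn0]
      simp

theorem pv_elim_len (col : Nat) (norm w : List Int) (h : norm.length = w.length) :
    (pvAltElim col norm w).length = w.length := by
  unfold pvAltElim
  by_cases hf : PySem.Int.mod (w.getD col 0) 3 = 0
  · rw [if_pos hf]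
  · rw [if_neg hf]
    simp [h]

theorem pv_elim_bnd_lt (col N : Nat) (norm r : List Int) (h : norm.length = r.length)
    (hb : ∀ i : Nat, i < N → 0 ≤ r.getD i 0 ∧ r.getD i 0 < 3) :
    ∀ i : Nat, i < N → 0 ≤ (pvAltElim col norm r).getD i 0 ∧ (pvAltElim col norm r).getD i 0 < 3 := by
  intro i hiN
  unfold pvAltElim
  by_cases hf : PySem.Int.mod (r.getD col 0) 3 = 0
  · rw [if_pos hf]; exact hb i hiN
  · rw [if_neg hf]
    by_cases hi : i < r.length
    · rw [List.getD_eq_getElem _ _ (by rw [List.length_zipWith]; omega), List.getElem_zipWith]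
      rw [pv_mod3]
      exact ⟨Int.emod_nonneg _ (by norm_num), Int.emod_lt_of_pos _ (by norm_num)⟩
    · rw [List.getD_eq_default _ _ (by rw [List.length_zipWith]; omega)]
      norm_num

theorem pv_elim_bnd (col : Nat) (norm r : List Int) (h : norm.length = r.length)
    (hb : pvBnd r) : pvBnd (pvAltElim col norm r) := by
  intro i
  unfold pvAltElim
  by_cases hf : PySem.Int.mod (r.getD col 0) 3 = 0
  · rw [if_pos hf]; exact hb i
  · rw [if_neg hf]
    by_cases hi : i < r.length
    · rw [List.getD_eq_getElem _ _ (by rw [List.length_zipWith]; omega), List.getElem_zipWith]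
      rw [pv_mod3]
      exact ⟨Int.emod_nonneg _ (by norm_num), Int.emod_lt_of_pos _ (by norm_num)⟩
    · rw [List.getD_eq_default _ _ (by rw [List.length_zipWith]; omega)]
      norm_num

-- ===== the remaining lemma skeletons (filled below, one at a time) =====

theorem pv_sh_elim (col : Nat) (norm R : List Int) (h : norm.length = R.length) :
    pvSh norm R (pvAltElim col norm R) (-(R.getD col 0)) := by
  refine ⟨(pv_elim_len col norm R h).symm, fun i => ?_⟩
  rw [pv_elim_mod col norm R h i]
  ring_nf

theorem pv_sh_step (col : Nat) (norm : List Int) (q : Nat) (R r r' : List Int) (c : Int)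
    (hq : norm.getD q 0 % 3 = 0) (hlR : R.length = norm.length) (hlr : r.length = norm.length)
    (hsh : pvSh norm r r' c) :
    pvSh norm (pvAltElim q R r) (pvAltElim q (pvAltElim col norm R) r')
      (c - r.getD q 0 * (-(R.getD col 0))) := by
  obtain ⟨hlen, hsh⟩ := hsh
  have hlER : (pvAltElim col norm R).length = r'.length := by
    rw [pv_elim_len col norm R (by omega)]; omega
  refine ⟨?_, fun i => ?_⟩
  · rw [pv_elim_len q R r (by omega), pv_elim_len q (pvAltElim col norm R) r' hlER]
    exact hlen
  · have hL : Int.ModEq 3 ((pvAltElim q (pvAltElim col norm R) r').getD i 0)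
        (r'.getD i 0 - r'.getD q 0 * (pvAltElim col norm R).getD i 0) :=
      pv_meq (pv_elim_mod q (pvAltElim col norm R) r' hlER i)
    have h1 : Int.ModEq 3 (r'.getD i 0) (r.getD i 0 + c * norm.getD i 0) := pv_meq (hsh i)
    have hq0 : Int.ModEq 3 (norm.getD q 0) 0 := by
      show _ % _ = _ % _; simpa using hq
    have h2 : Int.ModEq 3 (r'.getD q 0) (r.getD q 0) := by
      have := (pv_meq (hsh q)).trans ((Int.ModEq.refl (r.getD q 0)).add (hq0.mul_left c))
      simpa using this
    have h3 : Int.ModEq 3 ((pvAltElim col norm R).getD i 0)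
        (R.getD i 0 + -(R.getD col 0) * norm.getD i 0) :=
      pv_meq ((pv_sh_elim col norm R hlR.symm).2 i)
    have hR : Int.ModEq 3
        ((pvAltElim q R r).getD i 0 + (c - r.getD q 0 * -(R.getD col 0)) * norm.getD i 0)
        ((r.getD i 0 - r.getD q 0 * R.getD i 0)
          + (c - r.getD q 0 * -(R.getD col 0)) * norm.getD i 0) :=
      (pv_meq (pv_elim_mod q R r (by omega) i)).add_right _
    refine (hL.trans ?_).trans hR.symm
    refine (h1.sub (h2.mul h3)).trans ?_
    have : r.getD i 0 + c * norm.getD i 0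
          - r.getD q 0 * (R.getD i 0 + -(R.getD col 0) * norm.getD i 0)
        = (r.getD i 0 - r.getD q 0 * R.getD i 0)
          + (c - r.getD q 0 * -(R.getD col 0)) * norm.getD i 0 := by ring
    rw [this]

theorem pv_sh_chain (col : Nat) (norm : List Int) :
    ∀ (prs : List (Nat × List Int)) (r r' : List Int) (c : Int),
    (∀ pr ∈ prs, norm.getD pr.1 0 % 3 = 0 ∧ pr.2.length = norm.length) →
    r.length = norm.length → pvSh norm r r' c →
    ∃ c', pvSh norm (pvChain prs r)
      (pvChain (prs.map (fun pr => (pr.1, pvAltElim col norm pr.2))) r') c' := by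
  intro prs
  induction prs with
  | nil => intro r r' c _ _ hsh; exact ⟨c, hsh⟩
  | cons pr prs ih =>
    intro r r' c hh hlr hsh
    obtain ⟨hq, hlR⟩ := hh pr (by simp)
    show ∃ c', pvSh norm (pvChain prs (pvAltElim pr.1 pr.2 r))
      (pvChain (prs.map (fun pr => (pr.1, pvAltElim col norm pr.2)))
        (pvAltElim pr.1 (pvAltElim col norm pr.2) r')) c'
    exact ih (pvAltElim pr.1 pr.2 r) _ _ (fun pr' h' => hh pr' (by simp [h']))
      (by rw [pv_elim_len pr.1 pr.2 r (by omega)]; exact hlr)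
      (pv_sh_step col norm pr.1 pr.2 r r' c hq hlR hlr hsh)

theorem pv_mEq_elim_absorb (col : Nat) (norm s s' : List Int) (c : Int)
    (hc : norm.getD col 0 % 3 = 1) (hl : s.length = norm.length) (hsh : pvSh norm s s' c) :
    pvMEq (pvAltElim col norm s) (pvAltElim col norm s') := by
  obtain ⟨hlen, hsh⟩ := hsh
  refine ⟨?_, fun i => ?_⟩
  · rw [pv_elim_len col norm s hl.symm, pv_elim_len col norm s' (by omega)]
    exact hlen
  · have hn1 : Int.ModEq 3 (norm.getD col 0) 1 := by
      show _ % _ = _ % _; simpa using hc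
    have hL : Int.ModEq 3 ((pvAltElim col norm s).getD i 0)
        (s.getD i 0 - s.getD col 0 * norm.getD i 0) := pv_meq (pv_elim_mod col norm s hl.symm i)
    have hR : Int.ModEq 3 ((pvAltElim col norm s').getD i 0)
        (s'.getD i 0 - s'.getD col 0 * norm.getD i 0) := pv_meq (pv_elim_mod col norm s' (by omega) i)
    refine hL.trans (Int.ModEq.trans ?_ hR.symm)
    have h1 : Int.ModEq 3 (s.getD i 0 - s.getD col 0 * norm.getD i 0)
        ((s.getD i 0 + c * norm.getD i 0)
          - (s.getD col 0 + c * norm.getD col 0) * norm.getD i 0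
          + c * norm.getD i 0 * (norm.getD col 0 - 1)) := by
      have : (s.getD i 0 + c * norm.getD i 0)
          - (s.getD col 0 + c * norm.getD col 0) * norm.getD i 0
          + c * norm.getD i 0 * (norm.getD col 0 - 1)
        = s.getD i 0 - s.getD col 0 * norm.getD i 0
          + (c * norm.getD i 0 * (norm.getD col 0 - 1)
            - c * norm.getD col 0 * norm.getD i 0 + c * norm.getD i 0) := by ring
      rw [this]
      have hz : Int.ModEq 3 (c * norm.getD i 0 * (norm.getD col 0 - 1)
            - c * norm.getD col 0 * norm.getD i 0 + c * norm.getD i 0) 0 := by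
        have hcol0 : Int.ModEq 3 (norm.getD col 0 - 1) 0 := by
          simpa using hn1.sub (Int.ModEq.refl 1)
        have e1 : Int.ModEq 3 (c * norm.getD i 0 * (norm.getD col 0 - 1)) 0 := by
          simpa using hcol0.mul_left (c * norm.getD i 0)
        have e2 : Int.ModEq 3 (c * norm.getD col 0 * norm.getD i 0)
            (c * 1 * norm.getD i 0) := (hn1.mul_left c).mul_right _
        have := (e1.sub e2).add (Int.ModEq.refl (c * norm.getD i 0))
        simpa using this.trans (by show _ % _ = _ % _; norm_num)
      simpa using (Int.ModEq.refl (s.getD i 0 - s.getD col 0 * norm.getD i 0)).add hz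
    refine h1.trans ?_
    have h2 : Int.ModEq 3 ((s.getD i 0 + c * norm.getD i 0)
          - (s.getD col 0 + c * norm.getD col 0) * norm.getD i 0
          + c * norm.getD i 0 * (norm.getD col 0 - 1))
        (s'.getD i 0 - s'.getD col 0 * norm.getD i 0
          + c * norm.getD i 0 * (norm.getD col 0 - 1)) :=
      ((pv_meq (hsh i)).symm.sub ((pv_meq (hsh col)).symm.mul_right _)).add_right _
    refine h2.trans ?_
    have hz : Int.ModEq 3 (c * norm.getD i 0 * (norm.getD col 0 - 1)) 0 := by
      have hcol0 : Int.ModEq 3 (norm.getD col 0 - 1) 0 := by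
        simpa using hn1.sub (Int.ModEq.refl 1)
      simpa using hcol0.mul_left (c * norm.getD i 0)
    simpa using (Int.ModEq.refl (s'.getD i 0 - s'.getD col 0 * norm.getD i 0)).add hz

theorem pv_mEq_elim (q : Nat) (R R' r r' : List Int) (hR : pvMEq R R') (hr : pvMEq r r')
    (hl : R.length = r.length) : pvMEq (pvAltElim q R r) (pvAltElim q R' r') := by
  obtain ⟨hRl, hRm⟩ := hR
  obtain ⟨hrl, hrm⟩ := hr
  refine ⟨?_, fun i => ?_⟩
  · rw [pv_elim_len q R r hl, pv_elim_len q R' r' (by omega)]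
    exact hrl
  · have hL : Int.ModEq 3 ((pvAltElim q R r).getD i 0)
        (r.getD i 0 - r.getD q 0 * R.getD i 0) := pv_meq (pv_elim_mod q R r hl i)
    have hR' : Int.ModEq 3 ((pvAltElim q R' r').getD i 0)
        (r'.getD i 0 - r'.getD q 0 * R'.getD i 0) := pv_meq (pv_elim_mod q R' r' (by omega) i)
    exact hL.trans (((pv_meq (hrm i)).sub ((pv_meq (hrm q)).mul (pv_meq (hRm i)))).trans hR'.symm)

theorem pv_chain_len : ∀ (prs : List (Nat × List Int)) (r : List Int),
    (∀ pr ∈ prs, pr.2.length = r.length) → (pvChain prs r).length = r.length := by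
  intro prs
  induction prs with
  | nil => intro r h; rfl
  | cons pr prs ih =>
    intro r h
    show (pvChain prs (pvAltElim pr.1 pr.2 r)).length = r.length
    rw [ih (pvAltElim pr.1 pr.2 r) (fun pr' h' => by
      rw [pv_elim_len pr.1 pr.2 r (h pr (by simp))]
      exact h pr' (by simp [h']))]
    exact pv_elim_len pr.1 pr.2 r (h pr (by simp))

theorem pv_mEq_chain : ∀ (prs prs' : List (Nat × List Int)) (r r' : List Int),
    List.Forall₂ (fun a b : Nat × List Int => a.1 = b.1 ∧ pvMEq a.2 b.2) prs prs' →
    pvMEq r r' → (∀ pr ∈ prs, pr.2.length = r.length) →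
    pvMEq (pvChain prs r) (pvChain prs' r') := by
  intro prs prs' r r' h
  induction h generalizing r r' with
  | nil => intro hr _; exact hr
  | cons hpr htail ih =>
    rename_i a b prs₀ prs₀'
    intro hr hlen
    obtain ⟨hfst, hsnd⟩ := hpr
    show pvMEq (pvChain prs₀ (pvAltElim a.1 a.2 r)) (pvChain prs₀' (pvAltElim b.1 b.2 r'))
    have hstep : pvMEq (pvAltElim a.1 a.2 r) (pvAltElim b.1 b.2 r') := by
      rw [← hfst]
      exact pv_mEq_elim a.1 a.2 b.2 r r' hsnd hr (hlen a (by simp))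
    exact ih _ _ hstep (fun pr' h' => by
      rw [pv_elim_len a.1 a.2 r (hlen a (by simp))]
      exact hlen pr' (by simp [h']))

theorem pv_phiP_fst : ∀ ech : List (Nat × List Int), (pvPhiP ech).map Prod.fst = ech.map Prod.fst := by
  intro ech
  induction ech with
  | nil => rfl
  | cons pr es ih =>
    cases pr
    simp [pvPhiP, ih]

theorem pv_phiP_len (L : Nat) : ∀ ech : List (Nat × List Int),
    (∀ pr ∈ ech, pr.2.length = L) → ∀ pr ∈ pvPhiP ech, pr.2.length = L := by
  intro ech
  induction ech with
  | nil => intro _ pr h; simp [pvPhiP] at h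
  | cons pr0 es ih =>
    intro h pr hpr
    cases pr0 with
    | mk p row =>
      rw [show pvPhiP ((p, row) :: es) = (p, pvChain (pvPhiP es) row) :: pvPhiP es from rfl]
        at hpr
      rcases List.mem_cons.mp hpr with rfl | hpr
      · show (pvChain (pvPhiP es) row).length = L
        rw [pv_chain_len (pvPhiP es) row (fun pr' h' => by
          rw [h (p, row) (by simp)]
          exact ih (fun a ha => h a (by simp [ha])) pr' h')]
        exact h (p, row) (by simp)
      · exact ih (fun a ha => h a (by simp [ha])) pr hpr

theorem pv_mEq_refl (u : List Int) : pvMEq u u := ⟨rfl, fun _ => rfl⟩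

theorem pv_mEq_symm {u v : List Int} (h : pvMEq u v) : pvMEq v u :=
  ⟨h.1.symm, fun i => (h.2 i).symm⟩

theorem pv_mEq_trans {u v w : List Int} (h1 : pvMEq u v) (h2 : pvMEq v w) : pvMEq u w :=
  ⟨h1.1.trans h2.1, fun i => (h1.2 i).trans (h2.2 i)⟩

theorem pv_chain_bnd : ∀ (prs : List (Nat × List Int)) (r : List Int),
    (∀ pr ∈ prs, pr.2.length = r.length) → pvBnd r → pvBnd (pvChain prs r) := by
  intro prs
  induction prs with
  | nil => intro r _ hb; exact hb
  | cons pr prs ih =>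
    intro r h hb
    show pvBnd (pvChain prs (pvAltElim pr.1 pr.2 r))
    exact ih (pvAltElim pr.1 pr.2 r) (fun pr' h' => by
        rw [pv_elim_len pr.1 pr.2 r (h pr (by simp))]
        exact h pr' (by simp [h']))
      (pv_elim_bnd pr.1 pr.2 r (h pr (by simp)) hb)

theorem pv_phiP_snoc (col N : Nat) (norm : List Int) :
    ∀ ech : List (Nat × List Int),
    norm.length = N + 1 → norm.getD col 0 % 3 = 1 →
    (∀ pr ∈ ech, norm.getD pr.1 0 % 3 = 0) → (∀ pr ∈ ech, pr.2.length = N + 1) →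
    List.Forall₂ (fun a b : Nat × List Int => a.1 = b.1 ∧ pvMEq a.2 b.2)
      (pvPhiP (ech ++ [(col, norm)]))
      ((pvPhiP ech).map (fun pr => (pr.1, pvAltElim col norm pr.2)) ++ [(col, norm)]) := by
  intro ech
  induction ech with
  | nil =>
    intro _ _ _ _
    show List.Forall₂ _ [(col, pvChain (pvPhiP []) norm)] [(col, norm)]
    exact List.Forall₂.cons ⟨rfl, pv_mEq_refl norm⟩ List.Forall₂.nil
  | cons pr0 es ih =>
    intro hN hc1 h0 hl
    cases pr0 with
    | mk p row =>
      have hrowl : row.length = N + 1 := hl (p, row) (by simp)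
      have hles : ∀ pr ∈ es, pr.2.length = N + 1 := fun pr h => hl pr (by simp [h])
      have hlphi : ∀ pr ∈ pvPhiP es, pr.2.length = N + 1 := pv_phiP_len (N + 1) es hles
      have hlphi' : ∀ pr ∈ pvPhiP (es ++ [(col, norm)]), pr.2.length = N + 1 :=
        pv_phiP_len (N + 1) (es ++ [(col, norm)]) (fun pr h => by
          rcases List.mem_append.mp h with h | h
          · exact hles pr h
          · rw [List.mem_singleton.mp h]; exact hN)
      have hIH := ih hN hc1 (fun pr h => h0 pr (by simp [h])) hles
      show List.Forall₂ _
        ((p, pvChain (pvPhiP (es ++ [(col, norm)])) row) :: pvPhiP (es ++ [(col, norm)]))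
        ((p, pvAltElim col norm (pvChain (pvPhiP es) row))
          :: ((pvPhiP es).map (fun pr => (pr.1, pvAltElim col norm pr.2)) ++ [(col, norm)]))
      refine List.Forall₂.cons ⟨rfl, ?_⟩ hIH
      -- step 1: replace the Φ(es ++ [a]) chain pairs by their congruent images
      have hstep1 : pvMEq (pvChain (pvPhiP (es ++ [(col, norm)])) row)
          (pvChain ((pvPhiP es).map (fun pr => (pr.1, pvAltElim col norm pr.2))
            ++ [(col, norm)]) row) :=
        pv_mEq_chain _ _ row row hIH (pv_mEq_refl row)
          (fun pr h => by rw [hlphi' pr h, hrowl])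
      -- step 2: the appended pair acts last
      have hstep2 : pvChain ((pvPhiP es).map (fun pr => (pr.1, pvAltElim col norm pr.2))
            ++ [(col, norm)]) row
          = pvAltElim col norm
              (pvChain ((pvPhiP es).map (fun pr => (pr.1, pvAltElim col norm pr.2))) row) := by
        unfold pvChain
        rw [List.foldl_append]
        rfl
      -- step 3: commute the closure with the final elimination
      have hsh0 : pvSh norm row row 0 := ⟨rfl, fun i => by ring_nf⟩
      obtain ⟨c', hshc⟩ := pv_sh_chain col norm (pvPhiP es) row row 0
        (fun pr h => by
          refine ⟨?_, by rw [hlphi pr h, hN]⟩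
          have : pr.1 ∈ (pvPhiP es).map Prod.fst := List.mem_map.mpr ⟨pr, h, rfl⟩
          rw [pv_phiP_fst] at this
          rcases List.mem_map.mp this with ⟨a, ha, hfa⟩
          rw [← hfa]
          exact h0 a (by simp [ha]))
        (by rw [hrowl, hN]) hsh0
      have hstep3 : pvMEq (pvAltElim col norm (pvChain (pvPhiP es) row))
          (pvAltElim col norm
            (pvChain ((pvPhiP es).map (fun pr => (pr.1, pvAltElim col norm pr.2))) row)) :=
        pv_mEq_elim_absorb col norm _ _ c' hc1
          (by rw [pv_chain_len (pvPhiP es) row (fun pr h => by rw [hlphi pr h, hrowl]),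
                hrowl, hN])
          hshc
      exact pv_mEq_trans (pv_mEq_trans hstep1 (hstep2 ▸ pv_mEq_refl _)) (pv_mEq_symm hstep3)

-- Forall₂ plumbing for pvMEq
theorem pv_forall₂_symm : ∀ {l1 l2 : List (List Int)},
    List.Forall₂ pvMEq l1 l2 → List.Forall₂ pvMEq l2 l1 := by
  intro l1 l2 h
  induction h with
  | nil => exact List.Forall₂.nil
  | cons hab _ ih => exact List.Forall₂.cons (pv_mEq_symm hab) ih

theorem pv_forall₂_trans : ∀ {l1 l2 l3 : List (List Int)},
    List.Forall₂ pvMEq l1 l2 → List.Forall₂ pvMEq l2 l3 → List.Forall₂ pvMEq l1 l3 := by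
  intro l1 l2 l3 h
  induction h generalizing l3 with
  | nil => intro h2; cases h2; exact List.Forall₂.nil
  | cons hab htail ih =>
    intro h2
    cases h2 with
    | cons hbc htail2 => exact List.Forall₂.cons (pv_mEq_trans hab hbc) (ih htail2)

theorem pv_forall₂_snd : ∀ {p1 p2 : List (Nat × List Int)},
    List.Forall₂ (fun a b : Nat × List Int => a.1 = b.1 ∧ pvMEq a.2 b.2) p1 p2 →
    List.Forall₂ pvMEq (p1.map Prod.snd) (p2.map Prod.snd) := by
  intro p1 p2 h
  induction h with
  | nil => exact List.Forall₂.nil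
  | cons hab _ ih => exact List.Forall₂.cons hab.2 ih

theorem pv_forall₂_snoc {l1 l2 : List (List Int)} {x y : List Int}
    (h : List.Forall₂ pvMEq l1 l2) (hxy : pvMEq x y) :
    List.Forall₂ pvMEq (l1 ++ [x]) (l2 ++ [y]) := by
  induction h with
  | nil => exact List.Forall₂.cons hxy List.Forall₂.nil
  | cons hab _ ih => exact List.Forall₂.cons hab ih

theorem pv_forall₂_map_elim (col : Nat) (norm : List Int) :
    ∀ {l1 l2 : List (List Int)}, List.Forall₂ pvMEq l1 l2 →
    (∀ u ∈ l1, norm.length = u.length) →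
    List.Forall₂ pvMEq (l1.map (pvAltElim col norm)) (l2.map (pvAltElim col norm)) := by
  intro l1 l2 h
  induction h with
  | nil => intro _; exact List.Forall₂.nil
  | cons hab htail ih =>
    rename_i a b l1' l2'
    intro hlen
    exact List.Forall₂.cons
      (pv_mEq_elim col norm norm a b (pv_mEq_refl norm) hab (hlen a (by simp)))
      (ih (fun u hu => hlen u (by simp [hu])))

-- normalized rows are reduced entrywise
theorem pv_map_mod_bnd (inv : Int) (piv : List Int) :
    pvBnd (piv.map fun x => PySem.Int.mod (inv * x) 3) := by
  intro i
  by_cases hi : i < piv.length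
  · rw [List.getD_eq_getElem _ _ (by simpa using hi), List.getElem_map, pv_mod3]
    exact ⟨Int.emod_nonneg _ (by norm_num), Int.emod_lt_of_pos _ (by norm_num)⟩
  · rw [List.getD_eq_default _ _ (by simpa using hi)]
    norm_num

-- the big lockstep: Gauss-Jordan on (done, rest) vs forward elimination on (ech, rest)
theorem pv_sim2 (N : Nat) : ∀ (k c : Nat) (ech : List (Nat × List Int))
    (done rest : List (List Int)),
    c + k = N →
    pvEchOK N c ech →
    (∀ r ∈ rest, pvRestOK N (ech.map Prod.fst) r) →
    List.Forall₂ pvMEq done ((pvPhiP ech).map Prod.snd) →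
    (∀ r ∈ done, pvDoneOK N r) →
    (pvGJLoop (List.range' c k) done (ech.map Prod.fst) rest).2.2
        = (pvFwdLoop (List.range' c k) ech rest).2 ∧
    (pvGJLoop (List.range' c k) done (ech.map Prod.fst) rest).2.1
        = (pvFwdLoop (List.range' c k) ech rest).1.map Prod.fst ∧
    List.Forall₂ pvMEq (pvGJLoop (List.range' c k) done (ech.map Prod.fst) rest).1
        ((pvPhiP (pvFwdLoop (List.range' c k) ech rest).1).map Prod.snd) ∧
    pvEchOK N N (pvFwdLoop (List.range' c k) ech rest).1 ∧
    (∀ r ∈ (pvGJLoop (List.range' c k) done (ech.map Prod.fst) rest).1, pvDoneOK N r) := by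
  intro k
  induction k with
  | zero =>
    intro c ech done rest hck hech hrest hF hD
    refine ⟨rfl, rfl, hF, ⟨fun pr h => ?_, hech.2⟩, hD⟩
    obtain ⟨h1, h2, h3, h4⟩ := hech.1 pr h
    exact ⟨by omega, h2, h3, h4⟩
  | succ k ih =>
    intro c ech done rest hck hech hrest hF hD
    rw [List.range'_succ]
    by_cases hre : rest.isEmpty
    · rw [pvGJLoop, pvFwdLoop, if_pos hre, if_pos hre]
      refine ⟨rfl, rfl, hF, ⟨fun pr h => ?_, hech.2⟩, hD⟩
      obtain ⟨h1, h2, h3, h4⟩ := hech.1 pr h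
      exact ⟨by omega, h2, h3, h4⟩
    · rw [pvGJLoop, pvFwdLoop, if_neg hre, if_neg hre]
      have hrne : rest ≠ [] := by intro h; rw [h] at hre; simp at hre
      cases hfi : rest.findIdx? (fun r => PySem.Int.mod (r.getD c 0) 3 != 0) with
      | none =>
        refine ih (c + 1) ech done rest (by omega) ⟨fun pr h => ?_, hech.2⟩ hrest hF hD
        obtain ⟨h1, h2, h3, h4⟩ := hech.1 pr h
        exact ⟨by omega, h2, h3, h4⟩
      | some kk =>
        dsimp only
        set piv := rest.getD kk [] with hpivdef
        set pool := (if kk = 0 then rest.drop 1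
          else (rest.drop 1).set (kk - 1) (rest.getD 0 [])) with hpooldef
        set inv : Int := (if piv.getD c 0 = 1 then 1 else 2) with hinvdef
        set norm := piv.map (fun x => PySem.Int.mod (inv * x) 3) with hnormdef
        -- facts from the pivot search
        have hkk : kk < rest.length := (List.findIdx?_eq_some_iff_findIdx_eq.mp hfi).1
        have hpivmem : piv ∈ rest := by
          rw [hpivdef, List.getD_eq_getElem _ _ hkk]
          exact List.getElem_mem hkk
        have hpred : piv.getD c 0 % 3 ≠ 0 := by
          obtain ⟨hlt, hp, -⟩ := List.findIdx?_eq_some_iff_getElem.mp hfi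
          simp only [bne_iff_ne, ne_eq, decide_eq_true_eq] at hp
          rw [hpivdef, List.getD_eq_getElem _ _ hkk, ← pv_mod3]
          exact hp
        obtain ⟨hpivlen, hpivvan, hpivbnd⟩ := hrest piv hpivmem
        have hcN : c < N := by omega
        have hpivc : piv.getD c 0 = 1 ∨ piv.getD c 0 = 2 := by
          have := hpivbnd c hcN
          omega
        have hnormlen : norm.length = N + 1 := by
          rw [hnormdef, List.length_map, hpivlen]
        have hnormbnd : pvBnd norm := pv_map_mod_bnd inv piv
        have hgetnorm : ∀ q : Nat, q < N + 1 →
            norm.getD q 0 = PySem.Int.mod (inv * piv.getD q 0) 3 := by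
          intro q hq
          rw [hnormdef, List.getD_eq_getElem _ _ (by rw [List.length_map, hpivlen]; omega),
            List.getElem_map, List.getD_eq_getElem _ _ (by omega)]
        have hnormc : norm.getD c 0 % 3 = 1 := by
          rw [hgetnorm c (by omega), pv_mod3]
          rcases hpivc with h | h
          · rw [hinvdef, h, if_pos rfl]
            norm_num
          · rw [hinvdef, h, if_neg (by norm_num)]
            norm_num
        have hnormq0 : ∀ a ∈ ech, norm.getD a.1 0 % 3 = 0 := by
          intro a ha
          have haN : a.1 < N + 1 := by
            have := (hech.1 a ha).1
            omega
          rw [hgetnorm a.1 haN, pv_mod3]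
          have hq0 : piv.getD a.1 0 % 3 = 0 :=
            hpivvan a.1 (List.mem_map.mpr ⟨a, ha, rfl⟩)
          have hm : Int.ModEq 3 (inv * piv.getD a.1 0) 0 := by
            have := (pv_meq (show piv.getD a.1 0 % 3 = 0 % 3 by omega)).mul_left inv
            simpa using this
          have := pv_meq' hm
          omega
        have hpoolsub : ∀ r0 ∈ pool, r0 ∈ rest := by
          intro r0 h0
          rw [hpooldef] at h0
          by_cases hk0 : kk = 0
          · rw [if_pos hk0] at h0
            exact List.mem_of_mem_drop h0
          · rw [if_neg hk0] at h0
            rcases List.mem_or_eq_of_mem_set h0 with h1 | h1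
            · exact List.mem_of_mem_drop h1
            · rw [h1, List.getD_eq_getElem _ _ (List.length_pos_iff.mpr hrne)]
              exact List.getElem_mem _
        -- new invariants
        have hech' : pvEchOK N (c + 1) (ech ++ [(c, norm)]) := by
          constructor
          · intro pr h
            rcases List.mem_append.mp h with h | h
            · obtain ⟨h1, h2, h3, h4⟩ := hech.1 pr h
              exact ⟨by omega, h2, h3, h4⟩
            · rw [List.mem_singleton.mp h]
              exact ⟨by omega, hnormlen, hnormbnd, hnormc⟩
          · refine List.pairwise_append.mpr ⟨hech.2, by simp, ?_⟩
            intro a ha b hb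
            rw [List.mem_singleton.mp hb]
            exact ⟨(hech.1 a ha).1, hnormq0 a ha⟩
        have hrest' : ∀ r' ∈ pool.map (pvAltElim c norm),
            pvRestOK N ((ech ++ [(c, norm)]).map Prod.fst) r' := by
          intro r' h'
          obtain ⟨r0, hr0, rfl⟩ := List.mem_map.mp h'
          obtain ⟨h0len, h0van, h0bnd⟩ := hrest r0 (hpoolsub r0 hr0)
          have hlen0 : norm.length = r0.length := by omega
          refine ⟨by rw [pv_elim_len c norm r0 hlen0]; omega, ?_,
            pv_elim_bnd_lt c N norm r0 hlen0 h0bnd⟩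
          intro q hq
          rw [List.map_append] at hq
          have helim := pv_elim_mod c norm r0 hlen0 q
          rcases List.mem_append.mp hq with hq | hq
          · have hq0 : r0.getD q 0 % 3 = 0 := h0van q hq
            obtain ⟨a, ha, rfl⟩ := List.mem_map.mp hq
            have hn0 : norm.getD a.1 0 % 3 = 0 := hnormq0 a ha
            have hm : Int.ModEq 3 (r0.getD a.1 0 - r0.getD c 0 * norm.getD a.1 0) 0 := by
              have := (pv_meq (show r0.getD a.1 0 % 3 = 0 % 3 by omega)).sub
                ((pv_meq (show norm.getD a.1 0 % 3 = 0 % 3 by omega)).mul_left (r0.getD c 0))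
              simpa using this
            have := pv_meq' hm
            omega
          · have hqc : q = c := by simpa using hq
            subst hqc
            have hm : Int.ModEq 3 (r0.getD q 0 - r0.getD q 0 * norm.getD q 0) 0 := by
              have := (Int.ModEq.refl (r0.getD q 0)).sub
                ((pv_meq (show norm.getD q 0 % 3 = 1 % 3 by omega)).mul_left (r0.getD q 0))
              simp only [mul_one, sub_self] at this
              exact this
            have := pv_meq' hm
            omega
        have hF' : List.Forall₂ pvMEq (done.map (pvAltElim c norm) ++ [norm])
            ((pvPhiP (ech ++ [(c, norm)])).map Prod.snd) := by
          have hsnoc := pv_phiP_snoc c N norm ech hnormlen hnormc hnormq0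
            (fun pr h => (hech.1 pr h).2.1)
          have hsnocsnd := pv_forall₂_snd hsnoc
          have hre2 : (((pvPhiP ech).map (fun pr => (pr.1, pvAltElim c norm pr.2)))
                ++ [(c, norm)]).map Prod.snd
              = ((pvPhiP ech).map Prod.snd).map (pvAltElim c norm) ++ [norm] := by
            simp [List.map_map, Function.comp]
          rw [hre2] at hsnocsnd
          have hmapE : List.Forall₂ pvMEq (done.map (pvAltElim c norm))
              (((pvPhiP ech).map Prod.snd).map (pvAltElim c norm)) :=
            pv_forall₂_map_elim c norm hF (fun u hu => by
              rw [(hD u hu).1, hnormlen])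
          exact pv_forall₂_trans (pv_forall₂_snoc hmapE (pv_mEq_refl norm))
            (pv_forall₂_symm hsnocsnd)
        have hD' : ∀ r' ∈ done.map (pvAltElim c norm) ++ [norm], pvDoneOK N r' := by
          intro r' h'
          rcases List.mem_append.mp h' with h' | h'
          · obtain ⟨u, hu, rfl⟩ := List.mem_map.mp h'
            obtain ⟨hul, hub⟩ := hD u hu
            have hlenu : norm.length = u.length := by omega
            exact ⟨by rw [pv_elim_len c norm u hlenu]; omega,
              pv_elim_bnd c norm u hlenu hub⟩
          · rw [List.mem_singleton.mp h']
            exact ⟨hnormlen, hnormbnd⟩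
        have hIH := ih (c + 1) (ech ++ [(c, norm)]) (done.map (pvAltElim c norm) ++ [norm])
          (pool.map (pvAltElim c norm)) (by omega) hech' hrest' hF' hD'
        rw [show (ech ++ [(c, norm)]).map Prod.fst = ech.map Prod.fst ++ [c] by simp] at hIH
        exact hIH

-- chain value at an index, as a fold of subtractions (back-substitution shape)
theorem pv_chain_keepv (q : Nat) : ∀ (prs : List (Nat × List Int)) (r : List Int),
    (∀ pr ∈ prs, pr.2.getD q 0 % 3 = 0 ∧ pr.2.length = r.length) →
    (pvChain prs r).getD q 0 % 3 = r.getD q 0 % 3 := by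
  intro prs
  induction prs with
  | nil => intro r _; rfl
  | cons pr prs ih =>
    intro r h
    obtain ⟨hq0, hl⟩ := h pr (by simp)
    show (pvChain prs (pvAltElim pr.1 pr.2 r)).getD q 0 % 3 = r.getD q 0 % 3
    rw [ih (pvAltElim pr.1 pr.2 r) (fun pr' h' => by
      rw [pv_elim_len pr.1 pr.2 r hl]
      exact h pr' (by simp [h']))]
    refine pv_meq' ((pv_meq (pv_elim_mod pr.1 pr.2 r hl q)).trans ?_)
    have h0 : Int.ModEq 3 (pr.2.getD q 0) 0 := pv_meq (by omega)
    have h2 := (Int.ModEq.refl (r.getD q 0)).sub (h0.mul_left (r.getD pr.1 0))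
    simp only [mul_zero, sub_zero] at h2
    exact h2

theorem pv_chain_zero : ∀ (prs : List (Nat × List Int)) (r : List Int),
    List.Pairwise (fun a b : Nat × List Int => b.2.getD a.1 0 % 3 = 0) prs →
    (∀ pr ∈ prs, pr.2.getD pr.1 0 % 3 = 1 ∧ pr.2.length = r.length) →
    ∀ pr ∈ prs, (pvChain prs r).getD pr.1 0 % 3 = 0 := by
  intro prs
  induction prs with
  | nil => intro _ _ _ pr h; exact (List.not_mem_nil h).elim
  | cons pr0 prs ih =>
    intro r hpw hown pr hpr
    obtain ⟨h1own, h1len⟩ := hown pr0 (by simp)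
    have hlen' : ∀ pr' ∈ prs, pr'.2.length = (pvAltElim pr0.1 pr0.2 r).length := fun pr' h' => by
      rw [pv_elim_len pr0.1 pr0.2 r h1len]
      exact (hown pr' (by simp [h'])).2
    rcases List.mem_cons.mp hpr with rfl | hpr
    · show (pvChain prs (pvAltElim pr.1 pr.2 r)).getD pr.1 0 % 3 = 0
      rw [pv_chain_keepv pr.1 prs (pvAltElim pr.1 pr.2 r) (fun pr' h' =>
        ⟨(List.pairwise_cons.mp hpw).1 pr' h', hlen' pr' h'⟩)]
      have hsub := pv_elim_mod pr.1 pr.2 r h1len pr.1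
      have h1 : Int.ModEq 3 (pr.2.getD pr.1 0) 1 := pv_meq (by omega)
      have h2 := (Int.ModEq.refl (r.getD pr.1 0)).sub (h1.mul_left (r.getD pr.1 0))
      simp only [mul_one, sub_self] at h2
      have h2' : (r.getD pr.1 0 - r.getD pr.1 0 * pr.2.getD pr.1 0) % 3 = 0 % 3 := h2
      omega
    · exact ih (pvAltElim pr0.1 pr0.2 r) (List.pairwise_cons.mp hpw).2
        (fun pr' h' => ⟨(hown pr' (by simp [h'])).1, hlen' pr' h'⟩) pr hpr

theorem pv_foldsub_cong (t : Nat) : ∀ (l : List (Nat × List Int)) (s s' : Int)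
    (F F' : Nat → Int), Int.ModEq 3 s s' → (∀ pr ∈ l, Int.ModEq 3 (F pr.1) (F' pr.1)) →
    Int.ModEq 3 (l.foldl (fun s qr => s - F qr.1 * qr.2.getD t 0) s)
      (l.foldl (fun s qr => s - F' qr.1 * qr.2.getD t 0) s') := by
  intro l
  induction l with
  | nil => intro s s' F F' hs _; exact hs
  | cons pr l ih =>
    intro s s' F F' hs hF
    exact ih _ _ F F' (hs.sub ((hF pr (by simp)).mul_right _)) (fun pr' h' => hF pr' (by simp [h']))

theorem pv_chain_last (t : Nat) : ∀ (prs : List (Nat × List Int)) (r : List Int),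
    List.Pairwise (fun a b : Nat × List Int => a.2.getD b.1 0 % 3 = 0) prs →
    (∀ pr ∈ prs, pr.2.length = r.length) →
    (pvChain prs r).getD t 0 % 3
      = (prs.foldl (fun s qr => s - r.getD qr.1 0 * qr.2.getD t 0) (r.getD t 0)) % 3 := by
  intro prs
  induction prs with
  | nil => intro r _ _; rfl
  | cons pr0 prs ih =>
    intro r hpw hlen
    have h0len : pr0.2.length = r.length := hlen pr0 (by simp)
    have hlen' : ∀ pr' ∈ prs, pr'.2.length = (pvAltElim pr0.1 pr0.2 r).length := fun pr' h' => by
      rw [pv_elim_len pr0.1 pr0.2 r h0len]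
      exact hlen pr' (by simp [h'])
    show (pvChain prs (pvAltElim pr0.1 pr0.2 r)).getD t 0 % 3 = _
    rw [ih (pvAltElim pr0.1 pr0.2 r) (List.pairwise_cons.mp hpw).2 hlen']
    show _ = (prs.foldl (fun s qr => s - r.getD qr.1 0 * qr.2.getD t 0)
      (r.getD t 0 - r.getD pr0.1 0 * pr0.2.getD t 0)) % 3
    refine pv_meq' (pv_foldsub_cong t prs ((pvAltElim pr0.1 pr0.2 r).getD t 0)
      (r.getD t 0 - r.getD pr0.1 0 * pr0.2.getD t 0)
      (fun q => (pvAltElim pr0.1 pr0.2 r).getD q 0) (fun q => r.getD q 0) ?_ ?_)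
    · exact pv_meq (pv_elim_mod pr0.1 pr0.2 r h0len t)
    · intro pr' h'
      refine (pv_meq (pv_elim_mod pr0.1 pr0.2 r h0len pr'.1)).trans ?_
      have hz : Int.ModEq 3 (pr0.2.getD pr'.1 0) 0 :=
        pv_meq (by simpa using (List.pairwise_cons.mp hpw).1 pr' h')
      simpa using (Int.ModEq.refl (r.getD pr'.1 0)).sub (hz.mul_left (r.getD pr0.1 0))

-- the finished rows vanish at any column where every echelon row vanishes
theorem pv_phiP_vanish (q' : Nat) (L : Nat) : ∀ ech : List (Nat × List Int),
    (∀ pr ∈ ech, pr.2.getD q' 0 % 3 = 0) → (∀ pr ∈ ech, pr.2.length = L) →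
    ∀ pr ∈ pvPhiP ech, pr.2.getD q' 0 % 3 = 0 := by
  intro ech
  induction ech with
  | nil => intro _ _ pr h; simp [pvPhiP] at h
  | cons pr0 es ih =>
    intro h0 hlen pr hpr
    cases pr0 with
    | mk p row =>
      have hlrow : row.length = L := hlen (p, row) (by simp)
      rw [show pvPhiP ((p, row) :: es) = (p, pvChain (pvPhiP es) row) :: pvPhiP es from rfl]
        at hpr
      rcases List.mem_cons.mp hpr with rfl | hpr
      · show (pvChain (pvPhiP es) row).getD q' 0 % 3 = 0
        rw [pv_chain_keepv q' (pvPhiP es) row (fun pr' h' =>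
          ⟨ih (fun a ha => h0 a (by simp [ha])) (fun a ha => hlen a (by simp [ha])) pr' h',
           by rw [hlrow]
              exact pv_phiP_len L es (fun a ha => hlen a (by simp [ha])) pr' h'⟩)]
        exact h0 (p, row) (by simp)
      · exact ih (fun a ha => h0 a (by simp [ha])) (fun a ha => hlen a (by simp [ha])) pr hpr

-- structure of the finished rows: 1 on the own pivot, 0 on every other pivot, bounded
theorem pv_phiP_struct (N : Nat) : ∀ ech : List (Nat × List Int),
    pvEchOK N N ech →
    (∀ pr ∈ pvPhiP ech, pr.2.length = N + 1 ∧ pvBnd pr.2 ∧ pr.2.getD pr.1 0 % 3 = 1) ∧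
    List.Pairwise (fun a b : Nat × List Int =>
      b.2.getD a.1 0 % 3 = 0 ∧ a.2.getD b.1 0 % 3 = 0) (pvPhiP ech) := by
  intro ech
  induction ech with
  | nil => intro _; exact ⟨fun pr h => (List.not_mem_nil h).elim, List.Pairwise.nil⟩
  | cons pr0 es ih =>
    intro hOK
    obtain ⟨hall, hpw⟩ := hOK
    cases pr0 with
    | mk p row =>
      obtain ⟨hpN, hrowl, hrowb, hrow1⟩ := hall (p, row) (by simp)
      have hOKes : pvEchOK N N es :=
        ⟨fun pr h => hall pr (by simp [h]), (List.pairwise_cons.mp hpw).2⟩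
      obtain ⟨hS1, hS2⟩ := ih hOKes
      have hles : ∀ pr ∈ es, pr.2.length = N + 1 := fun pr h => (hall pr (by simp [h])).2.1
      have hlphi : ∀ pr ∈ pvPhiP es, pr.2.length = N + 1 := pv_phiP_len (N + 1) es hles
      have hvanp : ∀ pr ∈ es, pr.2.getD p 0 % 3 = 0 :=
        fun pr h => ((List.pairwise_cons.mp hpw).1 pr h).2
      have hphivanp : ∀ pr ∈ pvPhiP es, pr.2.getD p 0 % 3 = 0 :=
        pv_phiP_vanish p (N + 1) es hvanp hles
      have hchain0 : ∀ pr ∈ pvPhiP es,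
          (pvChain (pvPhiP es) row).getD pr.1 0 % 3 = 0 :=
        pv_chain_zero (pvPhiP es) row
          (List.Pairwise.imp (fun h => h.1) hS2)
          (fun pr h => ⟨(hS1 pr h).2.2, by rw [hlphi pr h, hrowl]⟩)
      constructor
      · intro pr hpr
        rw [show pvPhiP ((p, row) :: es)
            = (p, pvChain (pvPhiP es) row) :: pvPhiP es from rfl] at hpr
        rcases List.mem_cons.mp hpr with rfl | hpr
        · refine ⟨?_, ?_, ?_⟩
          · show (pvChain (pvPhiP es) row).length = N + 1
            rw [pv_chain_len (pvPhiP es) row (fun pr h => by rw [hlphi pr h, hrowl]), hrowl]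
          · exact pv_chain_bnd (pvPhiP es) row (fun pr h => by rw [hlphi pr h, hrowl]) hrowb
          · show (pvChain (pvPhiP es) row).getD p 0 % 3 = 1
            rw [pv_chain_keepv p (pvPhiP es) row (fun pr h =>
              ⟨hphivanp pr h, by rw [hlphi pr h, hrowl]⟩)]
            exact hrow1
        · exact hS1 pr hpr
      · rw [show pvPhiP ((p, row) :: es)
            = (p, pvChain (pvPhiP es) row) :: pvPhiP es from rfl]
        refine List.pairwise_cons.mpr ⟨?_, hS2⟩
        intro pr hpr
        exact ⟨hphivanp pr hpr, hchain0 pr hpr⟩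

-- getD after set
theorem pv_getD_set_ne (l : List Int) (i j : Nat) (v : Int) (h : i ≠ j) :
    (l.set i v).getD j 0 = l.getD j 0 := by
  unfold List.getD
  rw [List.getElem?_set_ne h]

theorem pv_getD_set_self (l : List Int) (i : Nat) (v : Int) (h : i < l.length) :
    (l.set i v).getD i 0 = v := by
  simp [List.getD, h]

-- fold-of-sets bookkeeping
theorem pv_foldset_comm (g : Nat × List Int → Int) (p : Nat) (v : Int) :
    ∀ (prs : List (Nat × List Int)) (x : List Int), p ∉ prs.map Prod.fst →
    prs.foldl (fun x pr => x.set pr.1 (g pr)) (x.set p v)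
      = (prs.foldl (fun x pr => x.set pr.1 (g pr)) x).set p v := by
  intro prs
  induction prs with
  | nil => intro x _; rfl
  | cons pr prs ih =>
    intro x hp
    rw [List.map_cons, List.mem_cons, not_or] at hp
    rw [List.foldl_cons, List.foldl_cons, List.set_comm _ _ hp.1, ih _ hp.2]

theorem pv_foldset_get_notmem (g : Nat × List Int → Int) (q : Nat) :
    ∀ (prs : List (Nat × List Int)) (x : List Int), q ∉ prs.map Prod.fst →
    (prs.foldl (fun x pr => x.set pr.1 (g pr)) x).getD q 0 = x.getD q 0 := by
  intro prs
  induction prs with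
  | nil => intro x _; rfl
  | cons pr prs ih =>
    intro x hq
    rw [List.map_cons, List.mem_cons, not_or] at hq
    rw [List.foldl_cons, ih _ hq.2, pv_getD_set_ne _ _ _ _ (fun h => hq.1 h.symm)]

theorem pv_foldset_get (g : Nat × List Int → Int) :
    ∀ (prs : List (Nat × List Int)) (x : List Int) (pr0 : Nat × List Int),
    (prs.map Prod.fst).Nodup → pr0 ∈ prs → pr0.1 < x.length →
    (prs.foldl (fun x pr => x.set pr.1 (g pr)) x).getD pr0.1 0 = g pr0 := by
  intro prs
  induction prs with
  | nil => intro x pr0 _ h _; exact (List.not_mem_nil h).elim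
  | cons pr prs ih =>
    intro x pr0 hnd hmem hlt
    rw [List.map_cons] at hnd
    rcases List.mem_cons.mp hmem with rfl | hmem
    · rw [List.foldl_cons, pv_foldset_get_notmem g pr0.1 prs _ (List.nodup_cons.mp hnd).1,
        pv_getD_set_self _ _ _ hlt]
    · rw [List.foldl_cons]
      exact ih _ pr0 (List.nodup_cons.mp hnd).2 hmem (by rw [List.length_set]; exact hlt)

-- fold two lists in lockstep when their elements act identically
theorem pv_foldl_congr₂ {α β γ : Type} (R : α → β → Prop) (f : γ → α → γ) (g : γ → β → γ)
    (h : ∀ (a : α) (b : β) (c : γ), R a b → f c a = g c b) :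
    ∀ (l1 : List α) (l2 : List β) (s : γ), List.Forall₂ R l1 l2 →
    l1.foldl f s = l2.foldl g s := by
  intro l1 l2 s hR
  induction hR generalizing s with
  | nil => rfl
  | cons hab htail ih =>
    rename_i a b l1' l2'
    rw [List.foldl_cons, List.foldl_cons, h a b s hab]
    exact ih _

-- back substitution reads off exactly the finished (fully reduced) right-hand sides
theorem pv_backsub_eq (N : Nat) : ∀ (ech : List (Nat × List Int)) (x0 : List Int),
    pvEchOK N N ech → x0.length = N →
    pvBackSub ech x0
      = (pvPhiP ech).foldl (fun x pr => x.set pr.1 (pr.2.getD N 0)) x0 := by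
  intro ech
  induction ech with
  | nil => intro x0 _ _; rfl
  | cons pr0 es ih =>
    intro x0 hOK hx0
    obtain ⟨hall, hpw⟩ := hOK
    cases pr0 with
    | mk p row =>
      obtain ⟨hpN, hrowl, hrowb, hrow1⟩ := hall (p, row) (by simp)
      have hOKes : pvEchOK N N es :=
        ⟨fun pr h => hall pr (by simp [h]), (List.pairwise_cons.mp hpw).2⟩
      have hles : ∀ pr ∈ es, pr.2.length = N + 1 := fun pr h => (hall pr (by simp [h])).2.1
      have hlphi : ∀ pr ∈ pvPhiP es, pr.2.length = N + 1 := pv_phiP_len (N + 1) es hles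
      obtain ⟨hS1, hS2⟩ := pv_phiP_struct N es hOKes
      have hfst : (pvPhiP es).map Prod.fst = es.map Prod.fst := pv_phiP_fst es
      have hpwlt : List.Pairwise (fun a b : Nat × List Int => a.1 < b.1) es :=
        (List.pairwise_cons.mp hpw).2.imp (fun h => h.1)
      have hndes : (es.map Prod.fst).Nodup :=
        (List.pairwise_map.mpr hpwlt).imp (fun h => Nat.ne_of_lt h)
      have hndphi : ((pvPhiP es).map Prod.fst).Nodup := by rw [hfst]; exact hndes
      have hpnotmem : p ∉ (pvPhiP es).map Prod.fst := by
        rw [hfst]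
        intro hmem
        rcases List.mem_map.mp hmem with ⟨b, hb, hfb⟩
        have := ((List.pairwise_cons.mp hpw).1 b hb).1
        omega
      set Y := (pvPhiP es).foldl (fun x pr => x.set pr.1 (pr.2.getD N 0)) x0 with hY
      set R0 := pvChain (pvPhiP es) row with hR0
      -- the right-hand side: set p last
      have hRHS : (pvPhiP ((p, row) :: es)).foldl (fun x pr => x.set pr.1 (pr.2.getD N 0)) x0
          = Y.set p (R0.getD N 0) := by
        rw [show pvPhiP ((p, row) :: es) = (p, R0) :: pvPhiP es from rfl, List.foldl_cons]
        exact pv_foldset_comm _ p (R0.getD N 0) (pvPhiP es) x0 hpnotmem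
      rw [hRHS]
      -- the left-hand side
      rw [show pvBackSub ((p, row) :: es) x0
          = (pvBackSub es x0).set p (PySem.Int.mod
              (es.foldl (fun s qr => s - row.getD qr.1 0 * (pvBackSub es x0).getD qr.1 0)
                (pvAltLast row)) 3) from rfl]
      rw [ih x0 hOKes hx0]
      congr 1
      rw [pv_mod3]
      -- base value: row[-1] is row.getD N
      have hbase : pvAltLast row = row.getD N 0 := by
        rw [pv_pyLast row (by intro h; rw [h] at hrowl; simp at hrowl),
          pv_getD_last row N hrowl]
      rw [hbase]
      -- the two folds agree literally
      have hfold : es.foldl (fun s qr => s - row.getD qr.1 0 * Y.getD qr.1 0) (row.getD N 0)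
          = (pvPhiP es).foldl (fun s qr => s - row.getD qr.1 0 * qr.2.getD N 0)
              (row.getD N 0) := by
        refine pv_foldl_congr₂ (fun a b : Nat × List Int =>
            a.1 = b.1 ∧ Y.getD a.1 0 = b.2.getD N 0) _ _ ?_ es (pvPhiP es) _ ?_
        · intro a b c hab
          rw [hab.1, ← hab.2, hab.1]
        · rw [List.forall₂_iff_get]
          have hlen2 : es.length = (pvPhiP es).length := by
            have := congrArg List.length hfst
            simpa using this.symm
          refine ⟨hlen2, fun i h1 h2 => ?_⟩
          have hfsti : (es.get ⟨i, h1⟩).1 = ((pvPhiP es).get ⟨i, h2⟩).1 := by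
            have := congrArg (fun l => l.getD i 0) hfst
            simp only [List.getD_eq_getElem?_getD, List.getElem?_map] at this
            rw [List.getElem?_eq_getElem h1, List.getElem?_eq_getElem h2] at this
            simpa using this.symm
          refine ⟨hfsti, ?_⟩
          rw [hfsti]
          exact pv_foldset_get _ (pvPhiP es) x0 ((pvPhiP es).get ⟨i, h2⟩) hndphi
            (List.get_mem _ _) (by
              rw [hx0, ← hfsti]
              exact (hall (es.get ⟨i, h1⟩) (by simp [List.get_mem])).1)
      rw [hfold]
      -- chain value at N
      have hchain := pv_chain_last N (pvPhiP es) row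
        (hS2.imp (fun h => h.2))
        (fun pr h => by rw [hlphi pr h, hrowl])
      have hbnd : 0 ≤ R0.getD N 0 ∧ R0.getD N 0 < 3 :=
        pv_chain_bnd (pvPhiP es) row (fun pr h => by rw [hlphi pr h, hrowl]) hrowb N
      rw [hR0] at *
      omega

-- A's read-off of the reduced rows equals B's back substitution
theorem pv_extract (N : Nat) (e : List (Nat × List Int)) (d : List (List Int))
    (he : pvEchOK N N e)
    (hf : List.Forall₂ pvMEq d ((pvPhiP e).map Prod.snd))
    (hd : ∀ row ∈ d, pvDoneOK N row) :
    ((e.map Prod.fst).zip d).foldl (fun x pr => x.set pr.1 (pvAltLast pr.2))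
        (List.replicate N 0)
      = pvBackSub e (List.replicate N 0) := by
  rw [pv_backsub_eq N e (List.replicate N 0) he (by simp)]
  obtain ⟨hS1, _hS2⟩ := pv_phiP_struct N e he
  have hfst : (pvPhiP e).map Prod.fst = e.map Prod.fst := pv_phiP_fst e
  have hdl : d.length = (pvPhiP e).length := by simpa using hf.length_eq
  have hel : e.length = (pvPhiP e).length := by
    have := congrArg List.length hfst
    simpa using this.symm
  refine pv_foldl_congr₂ (fun a b : Nat × List Int =>
      a.1 = b.1 ∧ pvAltLast a.2 = b.2.getD N 0) _ _ ?_ _ _ _ ?_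
  · intro a b c hab
    rw [hab.1, hab.2]
  · rw [List.forall₂_iff_get]
    constructor
    · rw [List.length_zip, List.length_map]
      omega
    · intro i h1 h2
      have hi_e : i < e.length := by
        rw [List.length_zip, List.length_map] at h1
        omega
      have hi_d : i < d.length := by omega
      have hget : ((e.map Prod.fst).zip d).get ⟨i, h1⟩ = (e[i].1, d[i]) := by
        simp [List.get_eq_getElem, List.getElem_zip]
      rw [hget]
      have hfsti : e[i].1 = ((pvPhiP e).get ⟨i, h2⟩).1 := by
        have := congrArg (fun l => l.getD i 0) hfst
        simp only [List.getD_eq_getElem?_getD, List.getElem?_map] at this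
        rw [List.getElem?_eq_getElem h2, List.getElem?_eq_getElem hi_e] at this
        simpa using this.symm
      refine ⟨hfsti, ?_⟩
      have hmeq := hf.get hi_d (show i < ((pvPhiP e).map Prod.snd).length by simpa using h2)
      simp only [List.get_eq_getElem, List.getElem_map] at hmeq
      obtain ⟨hdlen, hdbnd⟩ := hd d[i] (List.getElem_mem hi_d)
      obtain ⟨hplen, hpbnd, _⟩ := hS1 ((pvPhiP e).get ⟨i, h2⟩) (List.get_mem _ _)
      have hlast : pvAltLast d[i] = d[i].getD N 0 := by
        rw [pv_pyLast d[i] (by intro h; rw [h] at hdlen; simp at hdlen),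
          pv_getD_last d[i] N hdlen]
      rw [hlast]
      have hmod : d[i].getD N 0 % 3 = ((pvPhiP e).get ⟨i, h2⟩).2.getD N 0 % 3 := hmeq.2 N
      have hb1 := hdbnd N
      have hb2 := hpbnd N
      omega

-- ===== lemmas about port A, reused from the A-side simulation =====

-- linear search over range(rank, rank+len) matches findIdx? on the suffix list
theorem pv_find {α : Type} (rest : List α) (rank : Nat) (f : Nat → Bool) (g : α → Bool)
    (h : ∀ j (hj : j < rest.length), f (rank + j) = g rest[j]) :
    (List.range' rank rest.length).find? f = (rest.findIdx? g).map (fun k => rank + k) := by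
  induction rest generalizing rank with
  | nil => simp
  | cons a l ih =>
    rw [List.length_cons, List.range'_succ, List.find?_cons, List.findIdx?_cons]
    have h0 : f rank = g a := by simpa using h 0 (by simp)
    rw [h0]
    cases hga : g a with
    | true => simp
    | false =>
      rw [ih (rank + 1) (fun j hj => by
        have := h (j + 1) (by simpa using hj)
        simpa [Nat.add_assoc, Nat.add_comm 1 j] using this)]
      cases List.findIdx? g l <;> simp <;> omega

theorem pv_any {α : Type} (rest : List α) (rank : Nat) (f : Nat → Bool) (g : α → Bool)
    (h : ∀ j (hj : j < rest.length), f (rank + j) = g rest[j]) :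
    (List.range' rank rest.length).any f = rest.any g := by
  induction rest generalizing rank with
  | nil => simp
  | cons a l ih =>
    rw [List.length_cons, List.range'_succ, List.any_cons, List.any_cons]
    have h0 : f rank = g a := by simpa using h 0 (by simp)
    rw [h0, ih (rank + 1) (fun j hj => by
      have := h (j + 1) (by simpa using hj)
      simpa [Nat.add_assoc, Nat.add_comm 1 j] using this)]

-- swapping two in-range entries commutes with map
theorem pv_swap_map {α β : Type} (f : α → β) (l : List α) (i j : Nat) (d : α) (d' : β)
    (hi : i < l.length) (hj : j < l.length) :
    pvSwap (l.map f) i j d' = (pvSwap l i j d).map f := by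
  unfold pvSwap
  rw [List.getD_eq_getElem _ _ hi, List.getD_eq_getElem _ _ hj,
    List.getD_eq_getElem _ _ (by simpa using hj), List.getD_eq_getElem _ _ (by simpa using hi)]
  simp [List.map_set]

-- a swap of two entries located in the right part of an append
theorem pv_swap_append {α : Type} (u v : List α) (k : Nat) (d : α) (hk : k < v.length) :
    pvSwap (u ++ v) u.length (u.length + k) d = u ++ pvSwap v 0 k d := by
  unfold pvSwap
  have h0 : 0 < v.length := by omega
  rw [List.getD_eq_getElem _ _ (by simp; omega), List.getD_eq_getElem _ _ (by simp; omega),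
    List.getD_eq_getElem _ _ (by simpa using hk), List.getD_eq_getElem _ _ h0]
  rw [List.getElem_append_right (by omega), List.getElem_append_right (by omega)]
  rw [List.set_append_right _ _ (by omega), List.set_append_right _ _ (by omega)]
  simp

-- the swap that moves rest[k] to the front, in (piv :: pool) form
theorem pv_swap_cons {α : Type} (rest : List α) (k : Nat) (d : α) (hk : k < rest.length) :
    pvSwap rest 0 k d =
      rest.getD k d :: (if k = 0 then rest.drop 1 else (rest.drop 1).set (k - 1) (rest.getD 0 d)) := by
  cases rest with
  | nil => simp at hk
  | cons a l =>
    cases k with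
    | zero => simp [pvSwap]
    | succ j =>
      have hj : j < l.length := by simpa using hk
      simp [pvSwap, List.getD_cons_succ, List.getD_eq_getElem _ _ hj]

-- mapIdx over (map eu u ++ x :: map eu v) where the function only distinguishes index = u.length
theorem pv_mapIdx_map_congr {α β : Type} (v : List α) (eu : α → β) (g : α → β) :
    ∀ (f : Nat → β → β), (∀ i (hi : i < v.length), f i (eu v[i]) = g v[i]) →
      (v.map eu).mapIdx f = v.map g := by
  induction v with
  | nil => intro f h; simp
  | cons a l ih =>
    intro f h
    rw [List.map_cons, List.mapIdx_cons, List.map_cons]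
    rw [show f 0 (eu a) = g a from h 0 (by simp)]
    rw [ih (fun i => f (i + 1)) (fun i hi => h (i + 1) (by simpa using hi))]

theorem pv_mapIdx_split {α β : Type} (u : List α) (x : β) (v : List α) (eu : α → β)
    (g : α → β) (y : β) :
    ∀ (f : Nat → β → β),
    (∀ i (hi : i < u.length), f i (eu u[i]) = g u[i]) →
    f u.length x = y →
    (∀ i (hi : i < v.length), f (u.length + 1 + i) (eu v[i]) = g v[i]) →
    (u.map eu ++ x :: v.map eu).mapIdx f = u.map g ++ y :: v.map g := by
  induction u with
  | nil =>
    intro f hu hx hv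
    simp only [List.length_nil] at hx
    simp only [List.map_nil, List.nil_append, List.mapIdx_cons, hx]
    rw [pv_mapIdx_map_congr v eu g _ (fun i hi => by
      have h := hv i hi
      simp only [List.length_nil] at h
      rwa [show 0 + 1 + i = i + 1 by omega] at h)]
  | cons a l ih =>
    intro f hu hx hv
    simp only [List.map_cons, List.cons_append, List.mapIdx_cons]
    rw [show f 0 (eu a) = g a from hu 0 (by simp)]
    rw [ih _ (fun i hi => by
        have h := hu (i + 1) (by simpa using hi)
        simpa using h)
      (by
        have h := hx
        simp only [List.length_cons] at h
        exact h)
      (fun i hi => by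
        have h := hv i hi
        simp only [List.length_cons] at h
        rwa [show l.length + 1 + 1 + i = l.length + 1 + i + 1 by omega] at h)]

-- zipWith over equal-length lists as a map over range
theorem pv_zipWith_range (e : Int → Int → Int) :
    ∀ (n : Nat) (u v : List Int), u.length = n → v.length = n →
    List.zipWith e u v = (List.range n).map (fun c => e (u.getD c 0) (v.getD c 0)) := by
  intro n
  induction n with
  | zero => intro u v hu hv; simp [List.eq_nil_of_length_eq_zero hu]
  | succ m ih =>
    intro u v hu hv
    cases u with
    | nil => simp at hu
    | cons a u' =>
      cases v with
      | nil => simp at hv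
      | cons b v' =>
        rw [List.zipWith_cons_cons, List.range_succ_eq_map, List.map_cons, List.map_map]
        simp only [List.getD_cons_zero]
        rw [ih u' v' (by simpa using hu) (by simpa using hv)]
        congr 1

-- getD on dropLast agrees with getD on the list for indices below length - 1
theorem pv_dropLast_getD (w : List Int) (c : Nat) (hc : c + 1 < w.length) :
    w.dropLast.getD c 0 = w.getD c 0 := by
  rw [List.getD_eq_getElem _ _ (by simp; omega), List.getD_eq_getElem _ _ (by omega)]
  exact List.getElem_dropLast _

-- getLastD of a map
theorem pv_lastD_map (f : Int → Int) (l : List Int) (h : l ≠ []) :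
    (l.map f).getLastD 0 = f (l.getLastD 0) := by
  rw [List.getLastD_eq_getLast?, List.getLastD_eq_getLast?, List.getLast?_map]
  cases hl : l.getLast? with
  | none => exact absurd (List.getLast?_eq_none_iff.mp hl) h
  | some a => simp

-- the coefficient part of the augmented row elimination is A's matrix-row update
theorem pv_elim_c (nCols col : Nat) (norm w : List Int) (hcol : col < nCols)
    (hn : norm.length = nCols + 1) (hw : w.length = nCols + 1) :
    (pvAltElim col norm w).dropLast =
      (if PySem.Int.mod (w.dropLast.getD col 0) 3 ≠ 0 then
        (List.range nCols).map fun c =>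
          PySem.Int.mod (w.dropLast.getD c 0 -
            PySem.Int.mod (w.dropLast.getD col 0) 3 * norm.dropLast.getD c 0) 3
      else w.dropLast) := by
  have hfac : w.dropLast.getD col 0 = w.getD col 0 := pv_dropLast_getD w col (by omega)
  unfold pvAltElim
  rw [hfac]
  by_cases h : PySem.Int.mod (w.getD col 0) 3 = 0
  · rw [if_pos h, if_neg (fun hh => hh h)]
  · rw [if_neg h, if_pos h]
    rw [pv_zipWith_range _ (nCols + 1) w norm hw hn]
    rw [List.range_succ, List.map_append, List.map_singleton, List.dropLast_concat]
    apply List.map_congr_left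
    intro c hc
    have hc' : c < nCols := List.mem_range.mp hc
    rw [pv_dropLast_getD w c (by omega), pv_dropLast_getD norm c (by omega)]

-- the last entry of the augmented row elimination is A's vector update
theorem pv_elim_b (nCols col : Nat) (norm w : List Int) (hcol : col < nCols)
    (hn : norm.length = nCols + 1) (hw : w.length = nCols + 1) :
    (pvAltElim col norm w).getLastD 0 =
      (if PySem.Int.mod (w.dropLast.getD col 0) 3 ≠ 0 then
        PySem.Int.mod (w.getLastD 0 -
          PySem.Int.mod (w.dropLast.getD col 0) 3 * norm.getLastD 0) 3
      else w.getLastD 0) := by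
  have hfac : w.dropLast.getD col 0 = w.getD col 0 := pv_dropLast_getD w col (by omega)
  unfold pvAltElim
  rw [hfac]
  by_cases h : PySem.Int.mod (w.getD col 0) 3 = 0
  · rw [if_pos h, if_neg (fun hh => hh h)]
  · rw [if_neg h, if_pos h]
    rw [pv_zipWith_range _ (nCols + 1) w norm hw hn]
    rw [List.range_succ, List.map_append, List.map_singleton, List.getLastD_concat]
    rw [pv_getD_last w nCols hw, pv_getD_last norm nCols hn]

-- pvGJLoop preserves row lengths
theorem pv_gjLoop_len (n : Nat) :
    ∀ (cols : List Nat) (done pivots rest : _) ,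
    (∀ row ∈ done, List.length row = n + 1) → (∀ row ∈ rest, List.length row = n + 1) →
    (∀ row ∈ (pvGJLoop cols done pivots rest).1, List.length row = n + 1) ∧
    (∀ row ∈ (pvGJLoop cols done pivots rest).2.2, List.length row = n + 1) := by
  intro cols
  induction cols with
  | nil => intro done pivots rest hd hr; exact ⟨hd, hr⟩
  | cons col cols ih =>
    intro done pivots rest hd hr
    rw [pvGJLoop]
    by_cases hre : rest.isEmpty
    · rw [if_pos hre]; exact ⟨hd, hr⟩
    rw [if_neg hre]
    cases hfi : rest.findIdx? (fun r => PySem.Int.mod (r.getD col 0) 3 != 0) with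
    | none => exact ih done pivots rest hd hr
    | some k =>
      have hkr : k < rest.length := List.findIdx?_eq_some_iff_findIdx_eq.mp hfi |>.1
      have hrne : rest ≠ [] := by
        intro h; rw [h] at hkr; simp at hkr
      have hpiv : rest.getD k [] ∈ rest := by
        rw [List.getD_eq_getElem _ _ hkr]; exact List.getElem_mem hkr
      have hpl : (rest.getD k []).length = n + 1 := hr _ hpiv
      apply ih
      · intro row hrow
        rcases List.mem_append.mp hrow with h1 | h2
        · rcases List.mem_map.mp h1 with ⟨w, hw, rfl⟩
          rw [pv_elim_len]
          · exact hd _ hw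
          · rw [List.length_map, hpl, hd _ hw]
        · rcases List.mem_singleton.mp h2 with rfl
          rw [List.length_map]; exact hpl
      · intro row hrow
        rcases List.mem_map.mp hrow with ⟨w, hw, rfl⟩
        have hwrest : w ∈ rest := by
          by_cases hk0 : k = 0
          · rw [if_pos hk0] at hw
            exact List.mem_of_mem_drop hw
          · rw [if_neg hk0] at hw
            rcases List.mem_or_eq_of_mem_set hw with h1 | rfl
            · exact List.mem_of_mem_drop h1
            · rw [List.getD_eq_getElem _ _ (List.length_pos_iff.mpr hrne)]
              exact List.getElem_mem _
        rw [pv_elim_len]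
        · exact hr _ hwrest
        · rw [List.length_map, hpl, hr _ hwrest]

-- pvGJLoop keeps |pivots| = |done|
theorem pv_gjLoop_plen :
    ∀ (cols : List Nat) (done : List (List Int)) (pivots : List Nat) (rest : List (List Int)),
    pivots.length = done.length →
    (pvGJLoop cols done pivots rest).2.1.length = (pvGJLoop cols done pivots rest).1.length := by
  intro cols
  induction cols with
  | nil => intro done pivots rest h; exact h
  | cons col cols ih =>
    intro done pivots rest h
    rw [pvGJLoop]
    by_cases hre : rest.isEmpty
    · rw [if_pos hre]; exact h
    rw [if_neg hre]
    cases hfi : rest.findIdx? (fun r => PySem.Int.mod (r.getD col 0) 3 != 0) with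
    | none => exact ih done pivots rest h
    | some k => exact ih _ _ _ (by simp [h])

-- getD on a mapped append, right part / middle / left part
theorem pv_getD_right {α β : Type} (f : α → β) (u v : List α) (j : Nat) (d : β)
    (hj : j < v.length) : ((u ++ v).map f).getD (u.length + j) d = f v[j] := by
  rw [List.getD, List.getElem?_map, List.getElem?_append_right (by omega),
    show u.length + j - u.length = j by omega, List.getElem?_eq_getElem hj]
  rfl

theorem pv_getD_mid {α β : Type} (f : α → β) (u : List α) (x : α) (v : List α) (d : β) :
    ((u ++ x :: v).map f).getD u.length d = f x := by
  have := pv_getD_right f u (x :: v) 0 d (by simp)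
  simpa using this

theorem pv_getD_left {α β : Type} (f : α → β) (u v : List α) (i : Nat) (d : β)
    (hi : i < u.length) : ((u ++ v).map f).getD i d = f u[i] := by
  rw [List.getD_eq_getElem _ _ (by simp; omega)]
  rw [List.getElem_map, List.getElem_append_left hi]

-- THE A-SIDE SIMULATION: Gauss–Jordan on (matrix, vector) with index bookkeeping (port A's
-- loop) runs in lockstep with pvGJLoop on augmented (done, rest) rows.
theorem pv_sim (nCols : Nat) :
    ∀ (fuel : Nat) (col : Nat) (done rest : List (List Int)) (pivots : List Nat),
    col + fuel = nCols →
    (∀ row ∈ done, row.length = nCols + 1) →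
    (∀ row ∈ rest, row.length = nCols + 1) →
    pvRowReduceLoop (done.length + rest.length) nCols fuel
        ((done ++ rest).map List.dropLast) ((done ++ rest).map (fun r => r.getLastD 0))
        done.length col pivots
      = ((pvGJLoop (List.range' col fuel) done pivots rest).1.length,
         (((pvGJLoop (List.range' col fuel) done pivots rest).1
            ++ (pvGJLoop (List.range' col fuel) done pivots rest).2.2).map List.dropLast,
          (((pvGJLoop (List.range' col fuel) done pivots rest).1
            ++ (pvGJLoop (List.range' col fuel) done pivots rest).2.2).map (fun r => r.getLastD 0),
           (pvGJLoop (List.range' col fuel) done pivots rest).2.1))) := by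
  intro fuel
  induction fuel with
  | zero =>
    intro col done rest pivots hcol hd hr
    simp [pvRowReduceLoop, pvGJLoop]
  | succ f ih =>
    intro col done rest pivots hcol hd hr
    have hcolN : col < nCols := by omega
    rw [List.range'_succ]
    rcases rest with _ | ⟨r0, rs⟩
    · rw [pvRowReduceLoop, pvGJLoop]
      rw [if_neg (by simp), if_pos (by simp)]
    have hcond : done.length < done.length + (r0 :: rs).length ∧ col < nCols :=
      ⟨by simp, hcolN⟩
    rw [pvRowReduceLoop, if_pos hcond, pvGJLoop, if_neg (by simp)]
    have hmap : ∀ j (hj : j < (r0 :: rs).length),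
        (PySem.Int.mod ((((done ++ r0 :: rs).map List.dropLast).getD (done.length + j) []).getD col 0) 3 != 0)
          = (PySem.Int.mod ((r0 :: rs)[j].getD col 0) 3 != 0) := by
      intro j hj
      rw [pv_getD_right _ _ _ _ _ hj]
      rw [pv_dropLast_getD _ col (by rw [hr _ (List.getElem_mem hj)]; omega)]
    have hfp : pvFindPivot ((done ++ r0 :: rs).map List.dropLast) done.length
        (done.length + (r0 :: rs).length) col
        = ((r0 :: rs).findIdx? (fun r => PySem.Int.mod (r.getD col 0) 3 != 0)).map
            (fun k => done.length + k) := by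
      unfold pvFindPivot
      rw [show done.length + (r0 :: rs).length - done.length = (r0 :: rs).length by omega]
      exact pv_find _ _ _ _ hmap
    rw [hfp]
    cases hfi : (r0 :: rs).findIdx? (fun r => PySem.Int.mod (r.getD col 0) 3 != 0) with
    | none =>
      rw [Option.map_none]
      exact ih (col + 1) done (r0 :: rs) pivots (by omega) hd hr
    | some k =>
      rw [Option.map_some]
      have hk : k < (r0 :: rs).length := (List.findIdx?_eq_some_iff_findIdx_eq.mp hfi).1
      have hk' : k < rs.length + 1 := by simpa using hk
      dsimp only
      set piv := (r0 :: rs).getD k [] with hpiv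
      set pool := (if k = 0 then List.drop 1 (r0 :: rs)
        else (List.drop 1 (r0 :: rs)).set (k - 1) ((r0 :: rs).getD 0 [])) with hpool
      have hpivmem : piv ∈ r0 :: rs := by
        rw [hpiv, List.getD_eq_getElem _ _ hk]; exact List.getElem_mem hk
      have hpivlen : piv.length = nCols + 1 := hr _ hpivmem
      have hpivne : piv ≠ [] := by
        intro h; rw [h] at hpivlen; simp at hpivlen
      have hpoolmem : ∀ row ∈ pool, row ∈ r0 :: rs := by
        intro row hrow
        rw [hpool] at hrow
        by_cases hk0 : k = 0
        · rw [if_pos hk0] at hrow; exact List.mem_of_mem_drop hrow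
        · rw [if_neg hk0] at hrow
          rcases List.mem_or_eq_of_mem_set hrow with h1 | h2
          · exact List.mem_of_mem_drop h1
          · rw [h2, List.getD_cons_zero]; exact List.mem_cons_self
      have hpoolsz : pool.length = rs.length := by
        rw [hpool]; by_cases hk0 : k = 0 <;> simp [hk0]
      have hm1 : pvSwap ((done ++ r0 :: rs).map List.dropLast) done.length (done.length + k) []
          = (done ++ piv :: pool).map List.dropLast := by
        rw [pv_swap_map List.dropLast (done ++ r0 :: rs) done.length (done.length + k) [] []
          (by simp) (by simp; omega)]
        rw [pv_swap_append done (r0 :: rs) k [] hk, pv_swap_cons (r0 :: rs) k [] hk]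
      have hb1 : pvSwap ((done ++ r0 :: rs).map (fun r => r.getLastD 0)) done.length
          (done.length + k) 0 = (done ++ piv :: pool).map (fun r => r.getLastD 0) := by
        rw [pv_swap_map (fun r => r.getLastD 0) (done ++ r0 :: rs) done.length
          (done.length + k) [] 0 (by simp) (by simp; omega)]
        rw [pv_swap_append done (r0 :: rs) k [] hk, pv_swap_cons (r0 :: rs) k [] hk]
      rw [hm1, hb1]
      rw [pv_getD_mid List.dropLast done piv pool []]
      rw [pv_dropLast_getD piv col (by omega)]
      set inv := (if piv.getD col 0 = (1 : Int) then (1 : Int) else 2) with hinv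
      rw [List.map_dropLast]
      set norm := piv.map (fun x => PySem.Int.mod (inv * x) 3) with hnorm
      have hnlen : norm.length = nCols + 1 := by rw [hnorm, List.length_map, hpivlen]
      have hm2 : ((done ++ piv :: pool).map List.dropLast).set done.length norm.dropLast
          = (done ++ norm :: pool).map List.dropLast := by
        rw [← List.map_set, List.set_append_right _ _ (le_refl _), Nat.sub_self,
          List.set_cons_zero]
      rw [pv_getD_mid (fun r => r.getLastD 0) done piv pool 0]
      rw [show PySem.Int.mod (inv * piv.getLastD 0) 3 = norm.getLastD 0 from
        (by rw [hnorm, pv_lastD_map _ _ hpivne])]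
      have hb2 : ((done ++ piv :: pool).map (fun r => r.getLastD 0)).set done.length
          (norm.getLastD 0) = (done ++ norm :: pool).map (fun r => r.getLastD 0) := by
        rw [← List.map_set, List.set_append_right _ _ (le_refl _), Nat.sub_self,
          List.set_cons_zero]
      rw [hm2, hb2]
      have hpoollen : ∀ row ∈ pool, row.length = nCols + 1 :=
        fun row hrow => hr _ (hpoolmem _ hrow)
      have h7 : pvElimM nCols col done.length (List.map List.dropLast (done ++ norm :: pool))
          = List.map List.dropLast
              ((List.map (pvAltElim col norm) done ++ [norm]) ++ List.map (pvAltElim col norm) pool) := by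
        unfold pvElimM
        rw [pv_getD_mid List.dropLast done norm pool []]
        rw [List.map_append, List.map_cons]
        refine Eq.trans (pv_mapIdx_split done norm.dropLast pool List.dropLast
          (fun w => (pvAltElim col norm w).dropLast) norm.dropLast _ ?_ ?_ ?_) ?_
        · intro i hi
          rw [if_neg (Nat.ne_of_lt hi)]
          exact (pv_elim_c nCols col norm done[i] hcolN hnlen (hd _ (List.getElem_mem hi))).symm
        · rw [if_pos rfl]
        · intro i hi
          rw [if_neg (by omega)]
          exact (pv_elim_c nCols col norm pool[i] hcolN hnlen (hpoollen _ (List.getElem_mem hi))).symm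
        · simp [List.map_append, List.map_map]; rfl
      have h8 : pvElimV col done.length (List.map List.dropLast (done ++ norm :: pool))
            (List.map (fun r => r.getLastD 0) (done ++ norm :: pool))
          = List.map (fun r => r.getLastD 0)
              ((List.map (pvAltElim col norm) done ++ [norm]) ++ List.map (pvAltElim col norm) pool) := by
        unfold pvElimV
        rw [pv_getD_mid (fun r => r.getLastD 0) done norm pool 0]
        rw [show List.map (fun r => r.getLastD 0) (done ++ norm :: pool)
          = List.map (fun r => r.getLastD 0) done ++ norm.getLastD 0
              :: List.map (fun r => r.getLastD 0) pool from by simp]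
        refine Eq.trans (pv_mapIdx_split done (norm.getLastD 0) pool (fun r => r.getLastD 0)
          (fun w => (pvAltElim col norm w).getLastD 0) (norm.getLastD 0) _ ?_ ?_ ?_) ?_
        · intro i hi
          rw [if_neg (Nat.ne_of_lt hi)]
          rw [pv_getD_left List.dropLast done (norm :: pool) i [] hi]
          exact (pv_elim_b nCols col norm done[i] hcolN hnlen (hd _ (List.getElem_mem hi))).symm
        · rw [if_pos rfl]
        · intro i hi
          rw [if_neg (by omega)]
          have hgd : (List.map List.dropLast (done ++ norm :: pool)).getD (done.length + 1 + i) []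
              = pool[i].dropLast := by
            rw [show done.length + 1 + i = done.length + (i + 1) by omega]
            rw [pv_getD_right List.dropLast done (norm :: pool) (i + 1) [] (by simp; omega)]
            simp
          rw [hgd]
          exact (pv_elim_b nCols col norm pool[i] hcolN hnlen (hpoollen _ (List.getElem_mem hi))).symm
        · simp [List.map_append, List.map_map]; rfl
      rw [h7, h8]
      have hd' : ∀ row ∈ List.map (pvAltElim col norm) done ++ [norm], row.length = nCols + 1 := by
        intro row hrow
        rcases List.mem_append.mp hrow with h1 | h2
        · rcases List.mem_map.mp h1 with ⟨w, hw, rfl⟩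
          rw [pv_elim_len]
          · exact hd _ hw
          · rw [hnlen, hd _ hw]
        · rw [List.mem_singleton.mp h2]; exact hnlen
      have hr' : ∀ row ∈ List.map (pvAltElim col norm) pool, row.length = nCols + 1 := by
        intro row hrow
        rcases List.mem_map.mp hrow with ⟨w, hw, rfl⟩
        rw [pv_elim_len]
        · exact hpoollen _ hw
        · rw [hnlen, hpoollen _ hw]
      have hIH := ih (col + 1) (List.map (pvAltElim col norm) done ++ [norm])
        (List.map (pvAltElim col norm) pool) (pivots ++ [col]) (by omega) hd' hr'
      rw [show done.length + (r0 :: rs).length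
        = (List.map (pvAltElim col norm) done ++ [norm]).length
          + (List.map (pvAltElim col norm) pool).length from by simp [hpoolsz]; omega]
      rw [show done.length + 1 = (List.map (pvAltElim col norm) done ++ [norm]).length from by simp]
      exact hIH

-- 4^m = 1 mod 3
theorem pv_four_pow (m : Nat) : (4 : Int) ^ m % 3 = 1 := by
  induction m with
  | zero => norm_num
  | succ k ih => rw [pow_succ, Int.mul_emod, ih]; norm_num

-- closed form of v^n mod 3 for n > 0
theorem pv_pow3 (n : Nat) (v : Int) (hn : 0 < n) :
    PySem.Int.mod (v ^ n) 3
      = (if PySem.Int.mod v 3 = 2 ∧ n % 2 = 0 then 1 else PySem.Int.mod v 3) := by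
  rw [PySem.Int.mod_eq_emod_of_pos (by norm_num), PySem.Int.mod_eq_emod_of_pos (by norm_num)]
  have hp : v ^ n % 3 = (v % 3) ^ n % 3 := by
    have h : Int.ModEq 3 (v % 3) v := Int.emod_emod_of_dvd v dvd_rfl
    exact (h.pow n).symm
  rw [hp]
  have h0 : 0 ≤ v % 3 := Int.emod_nonneg v (by norm_num)
  have h3 : v % 3 < 3 := Int.emod_lt_of_pos v (by norm_num)
  rcases (by omega : v % 3 = 0 ∨ v % 3 = 1 ∨ v % 3 = 2) with h | h | h
  · rw [h, zero_pow (by omega : n ≠ 0)]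
    norm_num
  · rw [h, one_pow]
    norm_num
  · rw [h]
    rcases Nat.even_or_odd n with he | ho
    · obtain ⟨m, rfl⟩ := he
      rw [show (2 : Int) ^ (m + m) = 4 ^ m by rw [pow_add, ← mul_pow]; norm_num, pv_four_pow]
      rw [if_pos ⟨rfl, by omega⟩]
    · obtain ⟨m, rfl⟩ := ho
      rw [show (2 : Int) ^ (2 * m + 1) = 4 ^ m * 2 by rw [pow_succ, pow_mul]; norm_num]
      rw [Int.mul_emod, pv_four_pow]
      rw [if_neg (by omega)]
      norm_num

-- B's per-factor step function (proof-side name for the fold body of pvAltTerm)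
def pvStepB (val : Int) (ev : Int × Int) : Int :=
  if ev.1 ≠ 0 then
    PySem.Int.mod (val * (if PySem.Int.mod ev.2 3 = 2 ∧ PySem.Int.mod ev.1 2 = 0
      then 1 else PySem.Int.mod ev.2 3)) 3
  else val

theorem pv_stepB_bounds (val : Int) (ev : Int × Int) (h0 : 0 ≤ val) (h3 : val < 3) :
    0 ≤ pvStepB val ev ∧ pvStepB val ev < 3 := by
  unfold pvStepB
  split
  · exact ⟨PySem.Int.mod_nonneg _ (by norm_num), PySem.Int.mod_lt _ (by norm_num)⟩
  · exact ⟨h0, h3⟩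

-- A's per-factor step equals B's, for reduced val and nonnegative exponent
theorem pv_step_eq (val e v : Int) (he : 0 ≤ e) (h0 : 0 ≤ val) (h3 : val < 3) :
    PySem.Int.mod (val * PySem.Int.powMod v e.toNat 3) 3 = pvStepB val (e, v) := by
  unfold pvStepB
  simp only [PySem.Int.powMod]
  by_cases he0 : e = 0
  · subst he0
    rw [if_neg (by simp)]
    norm_num
    exact Int.emod_eq_of_lt h0 h3
  · rw [if_pos (by simpa using he0)]
    rw [pv_pow3 e.toNat v (by omega)]
    have hpar : (PySem.Int.mod e 2 = 0) ↔ (e.toNat % 2 = 0) := by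
      rw [PySem.Int.mod_eq_emod_of_pos (by norm_num : (0 : Int) < 2)]
      omega
    by_cases hc : PySem.Int.mod v 3 = 2 ∧ e.toNat % 2 = 0
    · rw [if_pos hc, if_pos ⟨hc.1, hpar.mpr hc.2⟩]
    · rw [if_neg hc, if_neg (fun hh => hc ⟨hh.1, hpar.mp hh.2⟩)]

-- the two monomial evaluators agree on nonnegative exponents
theorem pv_term (exp vars : Int × Int × Int) (h1 : 0 ≤ exp.1) (h2 : 0 ≤ exp.2.1)
    (h3 : 0 ≤ exp.2.2) : pvEvalMonomial exp vars = pvAltTerm exp vars := by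
  obtain ⟨e1, e2, e3⟩ := exp
  obtain ⟨v1, v2, v3⟩ := vars
  simp only at h1 h2 h3
  show PySem.Int.mod (PySem.Int.mod (PySem.Int.mod (1 * PySem.Int.powMod v1 e1.toNat 3) 3
      * PySem.Int.powMod v2 e2.toNat 3) 3 * PySem.Int.powMod v3 e3.toNat 3) 3
    = pvStepB (pvStepB (pvStepB 1 (e1, v1)) (e2, v2)) (e3, v3)
  have hb0 : (0 : Int) ≤ 1 ∧ (1 : Int) < 3 := by norm_num
  have hs1 := pv_step_eq 1 e1 v1 h1 hb0.1 hb0.2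
  have hb1 := pv_stepB_bounds 1 (e1, v1) hb0.1 hb0.2
  have hs2 := pv_step_eq (pvStepB 1 (e1, v1)) e2 v2 h2 hb1.1 hb1.2
  have hb2 := pv_stepB_bounds (pvStepB 1 (e1, v1)) (e2, v2) hb1.1 hb1.2
  have hs3 := pv_step_eq (pvStepB (pvStepB 1 (e1, v1)) (e2, v2)) e3 v3 h3 hb2.1 hb2.2
  rw [hs1, hs2, hs3]

-- B's term values are reduced
theorem pv_term_bounds (exp vars : Int × Int × Int) :
    0 ≤ pvAltTerm exp vars ∧ pvAltTerm exp vars < 3 := by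
  obtain ⟨e1, e2, e3⟩ := exp
  obtain ⟨v1, v2, v3⟩ := vars
  show 0 ≤ pvStepB (pvStepB (pvStepB 1 (e1, v1)) (e2, v2)) (e3, v3) ∧
      pvStepB (pvStepB (pvStepB 1 (e1, v1)) (e2, v2)) (e3, v3) < 3
  have hb0 : (0 : Int) ≤ 1 ∧ (1 : Int) < 3 := by norm_num
  have hb1 := pv_stepB_bounds 1 (e1, v1) hb0.1 hb0.2
  have hb2 := pv_stepB_bounds (pvStepB 1 (e1, v1)) (e2, v2) hb1.1 hb1.2
  exact pv_stepB_bounds _ (e3, v3) hb2.1 hb2.2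

-- members of B's monomial list have nonnegative components
theorem pv_mem_alt (d : Int) (exp : Int × Int × Int) (h : exp ∈ pvAltMonomials d) :
    0 ≤ exp.1 ∧ 0 ≤ exp.2.1 ∧ 0 ≤ exp.2.2 := by
  simp only [pvAltMonomials, List.mem_flatMap, List.mem_map] at h
  obtain ⟨e0, he0, e1, he1, e2, he2, rfl⟩ := h
  rw [PySem.List.mem_pyRange_one] at he0 he1 he2
  exact ⟨he0.1, he1.1, he2.1⟩

-- the two monomial generators produce the same list
theorem pv_mono (d : Int) : pvGenerateMonomials d = pvAltMonomials d := by
  unfold pvGenerateMonomials pvAltMonomials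
  by_cases hd : d + 1 ≤ 0
  · rw [PySem.List.pyRange_one_eq_nil hd]
    simp
  · apply List.flatMap_congr
    intro e0 he0
    rw [PySem.List.mem_pyRange_one] at he0
    have hinner : ∀ e1 ∈ PySem.List.pyRange 0 (d + 1) 1,
        (PySem.List.pyRange 0 (d + 1) 1).filterMap
          (fun e2 => if e0 + e1 + e2 ≤ d then some (e0, e1, e2) else none)
        = (PySem.List.pyRange 0 (d + 1 - e0 - e1) 1).map (fun e2 => (e0, e1, e2)) := by
      intro e1 he1
      rw [PySem.List.mem_pyRange_one] at he1
      by_cases hbig : d + 1 - e0 - e1 ≤ 0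
      · rw [PySem.List.pyRange_one_eq_nil hbig, List.map_nil]
        exact List.filterMap_eq_nil_iff.mpr (fun e2 he2 => by
          rw [PySem.List.mem_pyRange_one] at he2
          rw [if_neg (by omega)])
      · push_neg at hbig
        rw [PySem.List.pyRange_one_append 0 (d + 1 - e0 - e1) (d + 1) (by omega) (by omega)]
        rw [List.filterMap_append]
        rw [(List.filterMap_eq_nil_iff
          (l := PySem.List.pyRange (d + 1 - e0 - e1) (d + 1) 1)).mpr (fun e2 he2 => by
          rw [PySem.List.mem_pyRange_one] at he2
          rw [if_neg (by omega)])]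
        rw [List.append_nil]
        rw [List.filterMap_congr (g := fun e2 => some ((e0, e1, e2) : Int × Int × Int))
          (fun e2 he2 => by
            rw [PySem.List.mem_pyRange_one] at he2
            rw [if_pos (by omega)])]
        exact List.filterMap_eq_map_iff_forall_eq_some.mpr fun x => congrFun rfl
    rw [List.flatMap_congr hinner]
    rw [PySem.List.pyRange_one_append 0 (d + 1 - e0) (d + 1) (by omega) (by omega)]
    rw [List.flatMap_append]
    rw [(List.flatMap_eq_nil_iff
      (l := PySem.List.pyRange (d + 1 - e0) (d + 1) 1)).mpr (fun e1 he1 => by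
      rw [PySem.List.mem_pyRange_one] at he1
      rw [PySem.List.pyRange_one_eq_nil (by omega), List.map_nil])]
    rw [List.append_nil]

-- the enumerate-assignment loop is the zip fold
theorem pv_assign_eq (b2 : List Int) :
    ∀ (ps : List Nat) (ds : List (List Int)) (i : Nat) (x : List Int),
    ps.length = ds.length →
    (∀ j (hj : j < ds.length), b2.getD (i + j) 0 = pvAltLast ds[j]) →
    pvAssign b2 i ps x
      = (ps.zip ds).foldl (fun x pr => x.set pr.1 (pvAltLast pr.2)) x := by
  intro ps
  induction ps with
  | nil => intro ds i x h hj; simp [pvAssign]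
  | cons p ps ih =>
    intro ds i x h hj
    cases ds with
    | nil => simp at h
    | cons dcur ds' =>
      rw [pvAssign, List.zip_cons_cons, List.foldl_cons]
      rw [show b2.getD i 0 = pvAltLast dcur from by simpa using hj 0 (by simp)]
      exact ih ds' (i + 1) _ (by simpa using h) (fun j hjj => by
        have := hj (j + 1) (by simpa using hjj)
        rwa [show i + (j + 1) = i + 1 + j by omega] at this)

-- pvGJLoop preserves the total number of rows
theorem pv_gjLoop_total :
    ∀ (cols : List Nat) (done : List (List Int)) (pivots : List Nat) (rest : List (List Int)),
    (pvGJLoop cols done pivots rest).1.length + (pvGJLoop cols done pivots rest).2.2.length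
      = done.length + rest.length := by
  intro cols
  induction cols with
  | nil => intro done pivots rest; rfl
  | cons col cols ih =>
    intro done pivots rest
    rw [pvGJLoop]
    by_cases hre : rest.isEmpty
    · rw [if_pos hre]
    rw [if_neg hre]
    cases hfi : rest.findIdx? (fun r => PySem.Int.mod (r.getD col 0) 3 != 0) with
    | none => exact ih done pivots rest
    | some k =>
      have hrne : rest ≠ [] := by
        intro h; rw [h] at hre; simp at hre
      have hlen : (if k = 0 then List.drop 1 rest
          else (List.drop 1 rest).set (k - 1) (rest.getD 0 [])).length = rest.length - 1 := by
        by_cases hk0 : k = 0 <;> simp [hk0]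
      rw [ih]
      simp only [List.length_append, List.length_map, List.length_cons, List.length_nil, hlen]
      have : 0 < rest.length := List.length_pos_iff.mpr hrne
      omega

-- ===== VERDICT (by name: the statement is the Claim_ definition above) =====
theorem fit_polynomial_spec : Claim_equal_fit_polynomial := by
  intro samples degree _hdom hpre
  unfold Spec_fit_polynomial
  rcases samples with _ | ⟨s0, ss⟩
  · exact absurd rfl hpre
  unfold fit_polynomial fit_polynomial_alt
  dsimp only
  rw [pv_mono degree]
  set exps := pvAltMonomials degree with hexps
  have hterm : ∀ s : (Int × Int × Int) × Int,
      (exps.map fun exp => pvEvalMonomial exp s.1) = exps.map fun exp => pvAltTerm exp s.1 :=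
    fun s => List.map_congr_left (fun e he => by
      obtain ⟨ha, hb, hc⟩ := pv_mem_alt degree e he
      exact pv_term e s.1 ha hb hc)
  rw [show ((s0 :: ss).map fun s => exps.map fun exp => pvEvalMonomial exp s.1)
      = ((s0 :: ss).map fun s => (exps.map fun exp => pvAltTerm exp s.1) ++ [s.2]).map
          List.dropLast from by
    rw [List.map_map]
    exact List.map_congr_left (fun s hs => by
      simp only [Function.comp_apply]
      rw [List.dropLast_concat]
      exact hterm s)]
  rw [show ((s0 :: ss).map fun s => s.2)
      = ((s0 :: ss).map fun s => (exps.map fun exp => pvAltTerm exp s.1) ++ [s.2]).map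
          (fun r => r.getLastD 0) from by
    rw [List.map_map]
    exact List.map_congr_left (fun s hs => by
      simp only [Function.comp_apply]
      exact List.getLastD_concat.symm)]
  set rows := (s0 :: ss).map (fun s => (exps.map fun exp => pvAltTerm exp s.1) ++ [s.2])
    with hrows
  have hrowlen : ∀ row ∈ rows, row.length = exps.length + 1 := by
    rw [hrows]
    intro row hrow
    rcases List.mem_map.mp hrow with ⟨s, hs, rfl⟩
    simp
  unfold pvSolveLinearMod3 pvRowReduceMod3
  dsimp only
  have hlen0 : ((rows.map List.dropLast).getD 0 []).length = exps.length := by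
    rw [hrows]
    simp
  rw [hlen0, List.length_map]
  have hsim := pv_sim exps.length exps.length 0 [] rows [] (by omega) (by simp) hrowlen
  simp only [List.nil_append, List.length_nil, Nat.zero_add] at hsim
  rcases hsplit : pvGJLoop (List.range' 0 exps.length) [] [] rows with ⟨d, p, r⟩
  rw [hsplit] at hsim
  dsimp only at hsim
  rw [hsim]
  dsimp only
  have hrestOK : ∀ row ∈ rows, pvRestOK exps.length (([] : List (Nat × List Int)).map Prod.fst) row := by
    rw [hrows]
    intro row hrow
    rcases List.mem_map.mp hrow with ⟨s, hs, rfl⟩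
    refine ⟨by simp, by simp, ?_⟩
    intro i hi
    rw [List.getD_eq_getElem _ _ (by simp; omega),
      List.getElem_append_left (by simpa using hi), List.getElem_map]
    exact pv_term_bounds _ _
  have hsim2 := pv_sim2 exps.length exps.length 0 [] [] rows (by omega)
    ⟨by simp, by simp [pvPhiP]⟩ hrestOK (by simp [pvPhiP]) (by simp)
  simp only [List.map_nil] at hsim2
  rw [hsplit] at hsim2
  rw [List.range_eq_range']
  rcases hsplit2 : pvFwdLoop (List.range' 0 exps.length) [] rows with ⟨e, r2⟩
  rw [hsplit2] at hsim2
  obtain ⟨hr_eq, hp_eq, hforall, hech, hdone⟩ := hsim2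
  dsimp only at hech hdone
  dsimp only at hr_eq hp_eq hforall
  -- the inconsistency check: identical lists
  have hlens := pv_gjLoop_len exps.length (List.range' 0 exps.length) [] [] rows
    (by simp) hrowlen
  rw [hsplit] at hlens
  dsimp only at hlens
  have hdr := pv_gjLoop_total (List.range' 0 exps.length) [] [] rows
  rw [hsplit] at hdr
  dsimp only at hdr
  simp only [List.length_nil, Nat.zero_add] at hdr
  have hcond : ((List.range' d.length (rows.length - d.length)).any
        (fun i => PySem.Int.mod (((d ++ r).map (fun r => r.getLastD 0)).getD i 0) 3 != 0))
      = r.any (fun row => PySem.Int.mod (pvAltLast row) 3 != 0) := by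
    rw [show rows.length - d.length = r.length from by omega]
    apply pv_any
    intro j hj
    rw [pv_getD_right _ _ _ _ _ hj]
    rw [pv_pyLast r[j] (by
      intro h
      have := hlens.2 r[j] (List.getElem_mem hj)
      rw [h] at this
      simp at this)]
  rw [hcond, hr_eq]
  by_cases hinc : r2.any (fun row => PySem.Int.mod (pvAltLast row) 3 != 0)
  · rw [if_pos hinc, if_pos hinc]
  · rw [if_neg hinc, if_neg hinc]
    have hplen := pv_gjLoop_plen (List.range' 0 exps.length) [] [] rows (by simp)
    rw [hsplit] at hplen
    dsimp only at hplen
    rw [pv_assign_eq ((d ++ r2).map (fun r => r.getLastD 0)) p d 0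
      (List.replicate exps.length 0) hplen (fun j hj => by
        rw [Nat.zero_add, pv_getD_left _ _ _ _ _ hj]
        rw [pv_pyLast d[j] (by
          intro h
          have := hlens.1 d[j] (List.getElem_mem hj)
          rw [h] at this
          simp at this)])]
    rw [hp_eq]
    rw [pv_extract exps.length e d hech hforall hdone]
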